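-- pv_equiv track=rewrite | github.com/pypi-data/pypi-mirror-397 | packages/consoul/consoul-0.4.0.tar.gz/consoul-0.4.0/src/consoul/tui/widgets/model_picker_modal.py | _get_ollama_model_description
-- ===== SOURCE A (Python) =====
-- def _get_ollama_model_description(model_name: str) -> str:
--     """Generate a helpful description for an Ollama model based on its name.
--
--     Args:
--         model_name: The Ollama model name (e.g., "llama3.2:3b", "qwen2.5-coder:7b")
--
--     Returns:
--         A descriptive string about the model
--     """
--     name_lower = model_name.lower()
--
--     # Extract size from model name if present
--     size_match = ""
--     for size in ["0.5b", "1b", "3b", "7b", "8b", "14b", "32b", "70b", "405b"]: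
--         if size in name_lower:
--             size_match = size.upper()
--             break
--
--     # Identify model family and provide specific descriptions
--     if "llama3.3" in name_lower or "llama-3.3" in name_lower:
--         return f"Meta Llama 3.3 {size_match}".strip() or "Meta Llama 3.3"
--     elif "llama3.2" in name_lower or "llama-3.2" in name_lower:
--         if "vision" in name_lower:
--             return f"Meta Llama 3.2 Vision {size_match}".strip()
--         return f"Meta Llama 3.2 {size_match}".strip() or "Meta Llama 3.2"
--     elif "llama3.1" in name_lower or "llama-3.1" in name_lower:
--         return f"Meta Llama 3.1 {size_match}".strip() or "Meta Llama 3.1"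
--     elif "llama3" in name_lower or "llama-3" in name_lower:
--         return f"Meta Llama 3 {size_match}".strip() or "Meta Llama 3"
--     elif "llama2" in name_lower:
--         return f"Meta Llama 2 {size_match}".strip() or "Meta Llama 2 (legacy)"
--     elif "qwen2.5-coder" in name_lower:
--         return f"Qwen 2.5 Coder {size_match}".strip() or "Qwen 2.5 Coder"
--     elif "qwen2.5" in name_lower:
--         return f"Qwen 2.5 {size_match}".strip() or "Qwen 2.5"
--     elif "qwen2" in name_lower:
--         return f"Qwen 2 {size_match}".strip() or "Qwen 2"
--     elif "mistral" in name_lower and "nemo" in name_lower: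
--         return "Mistral Nemo 12B"
--     elif "mistral" in name_lower:
--         return f"Mistral {size_match}".strip() or "Mistral"
--     elif "mixtral" in name_lower:
--         return "Mixtral MoE" if not size_match else f"Mixtral {size_match} MoE"
--     elif "gemma2" in name_lower:
--         return f"Google Gemma 2 {size_match}".strip() or "Google Gemma 2"
--     elif "gemma" in name_lower:
--         return f"Google Gemma {size_match}".strip() or "Google Gemma"
--     elif "phi3" in name_lower or "phi-3" in name_lower:
--         return f"Microsoft Phi-3 {size_match}".strip() or "Microsoft Phi-3"
--     elif "codestral" in name_lower:
--         return "Mistral Codestral (coding)"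
--     elif "codegemma" in name_lower:
--         return f"Google CodeGemma {size_match}".strip() or "Google CodeGemma"
--     elif "deepseek-coder" in name_lower:
--         return f"DeepSeek Coder {size_match}".strip() or "DeepSeek Coder"
--     elif "deepseek" in name_lower:
--         return f"DeepSeek {size_match}".strip() or "DeepSeek"
--     elif "dolphin" in name_lower:
--         return "Dolphin (uncensored)"
--     elif "yi" in name_lower:
--         return f"01.AI Yi {size_match}".strip() or "01.AI Yi"
--     elif "granite" in name_lower and "code" in name_lower:
--         return f"IBM Granite Code {size_match}".strip() or "IBM Granite Code"
--     elif "granite" in name_lower: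
--         return f"IBM Granite {size_match}".strip() or "IBM Granite"
--     elif "solar" in name_lower:
--         return "Upstage SOLAR"
--     elif "nous" in name_lower or "hermes" in name_lower:
--         return "Nous Hermes"
--     elif "orca" in name_lower:
--         return "Microsoft Orca"
--     elif "vicuna" in name_lower:
--         return "Vicuna"
--     elif "falcon" in name_lower:
--         return f"TII Falcon {size_match}".strip() or "TII Falcon"
--     elif "starcoder" in name_lower:
--         return "StarCoder (coding)"
--     elif "wizardcoder" in name_lower:
--         return "WizardCoder (coding)"
--
--     # Default fallback
--     return "Local Ollama model"
-- ===== SOURCE B (Python) =====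
-- # Different algorithm: instead of testing ~40 substrings against the name one by
-- # one through an if/elif cascade, B makes a single positional sweep over the
-- # lowered name, collecting the set of canonical tokens whose keyword starts at
-- # each index; the family is then the present token of minimal rank (an integer
-- # min over the collected set), and its description template is instantiated with
-- # the size once, centrally.
--
-- _SIZES = ("0.5b", "1b", "3b", "7b", "8b", "14b", "32b", "70b", "405b")
--
-- # keyword -> canonical token (hyphenated spelling variants collapse to one token;
-- # "nous"/"hermes" are interchangeable in A, so they share a token)
-- _CANON = {
--     "llama3.3": "llama3.3", "llama-3.3": "llama3.3",
--     "llama3.2": "llama3.2", "llama-3.2": "llama3.2",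
--     "llama3.1": "llama3.1", "llama-3.1": "llama3.1",
--     "llama3": "llama3", "llama-3": "llama3",
--     "llama2": "llama2",
--     "qwen2.5-coder": "qwen2.5-coder", "qwen2.5": "qwen2.5", "qwen2": "qwen2",
--     "mistral": "mistral", "nemo": "nemo", "mixtral": "mixtral",
--     "gemma2": "gemma2", "gemma": "gemma",
--     "phi3": "phi3", "phi-3": "phi3",
--     "codestral": "codestral", "codegemma": "codegemma",
--     "deepseek-coder": "deepseek-coder", "deepseek": "deepseek",
--     "dolphin": "dolphin", "yi": "yi",
--     "granite": "granite", "code": "code", "vision": "vision",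
--     "solar": "solar", "nous": "nous-hermes", "hermes": "nous-hermes",
--     "orca": "orca", "vicuna": "vicuna", "falcon": "falcon",
--     "starcoder": "starcoder", "wizardcoder": "wizardcoder",
-- }
--
-- # family token -> rank (A's precedence order); _DESC[rank] is the description
-- # template, "{s}" standing for " SIZE" (or "" when no size was found)
-- _RANK = {
--     "llama3.3": 0, "llama3.2-vision": 1, "llama3.2": 2, "llama3.1": 3,
--     "llama3": 4, "llama2": 5, "qwen2.5-coder": 6, "qwen2.5": 7, "qwen2": 8,
--     "mistral-nemo": 9, "mistral": 10, "mixtral": 11, "gemma2": 12, "gemma": 13,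
--     "phi3": 14, "codestral": 15, "codegemma": 16, "deepseek-coder": 17,
--     "deepseek": 18, "dolphin": 19, "yi": 20, "granite-code": 21, "granite": 22,
--     "solar": 23, "nous-hermes": 24, "orca": 25, "vicuna": 26, "falcon": 27,
--     "starcoder": 28, "wizardcoder": 29,
-- }
--
-- _DESC = [
--     "Meta Llama 3.3{s}", "Meta Llama 3.2 Vision{s}", "Meta Llama 3.2{s}",
--     "Meta Llama 3.1{s}", "Meta Llama 3{s}", "Meta Llama 2{s}",
--     "Qwen 2.5 Coder{s}", "Qwen 2.5{s}", "Qwen 2{s}", "Mistral Nemo 12B",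
--     "Mistral{s}", "Mixtral{s} MoE", "Google Gemma 2{s}", "Google Gemma{s}",
--     "Microsoft Phi-3{s}", "Mistral Codestral (coding)", "Google CodeGemma{s}",
--     "DeepSeek Coder{s}", "DeepSeek{s}", "Dolphin (uncensored)", "01.AI Yi{s}",
--     "IBM Granite Code{s}", "IBM Granite{s}", "Upstage SOLAR", "Nous Hermes",
--     "Microsoft Orca", "Vicuna", "TII Falcon{s}", "StarCoder (coding)",
--     "WizardCoder (coding)",
-- ]
--
--
-- def _get_ollama_model_description(model_name: str) -> str:
--     name_lower = model_name.lower()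
--
--     # one sweep over the string: which keywords occur, recorded as tokens
--     tokens = set()
--     for i in range(len(name_lower)):
--         for kw, tok in _CANON.items():
--             if name_lower.startswith(kw, i):
--                 tokens.add(tok)
--         for sz in _SIZES:
--             if name_lower.startswith(sz, i):
--                 tokens.add(sz)
--
--     size = next((sz.upper() for sz in _SIZES if sz in tokens), "")
--
--     # composite families: two tokens jointly form a higher-precedence family
--     if "mistral" in tokens and "nemo" in tokens:
--         tokens.add("mistral-nemo")
--     if "granite" in tokens and "code" in tokens:
--         tokens.add("granite-code")
--     if "llama3.2" in tokens and "vision" in tokens: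
--         tokens.add("llama3.2-vision")
--
--     ranks = [_RANK[t] for t in tokens if t in _RANK]
--     if not ranks:
--         return "Local Ollama model"
--     return _DESC[min(ranks)].replace("{s}", " " + size if size else "")
-- ===== Notes on version B (the rewrite author's own statement) =====
-- stated objective: alternative
-- what changed: Instead of A's ~40 independent substring tests feeding an if/elif cascade, B makes one positional sweep over the lowered name collecting the set of keyword tokens present (startswith at each index), then selects the family as the integer minimum of the present tokens' ranks and instantiates a single description template with the size.
import Mathlib
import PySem

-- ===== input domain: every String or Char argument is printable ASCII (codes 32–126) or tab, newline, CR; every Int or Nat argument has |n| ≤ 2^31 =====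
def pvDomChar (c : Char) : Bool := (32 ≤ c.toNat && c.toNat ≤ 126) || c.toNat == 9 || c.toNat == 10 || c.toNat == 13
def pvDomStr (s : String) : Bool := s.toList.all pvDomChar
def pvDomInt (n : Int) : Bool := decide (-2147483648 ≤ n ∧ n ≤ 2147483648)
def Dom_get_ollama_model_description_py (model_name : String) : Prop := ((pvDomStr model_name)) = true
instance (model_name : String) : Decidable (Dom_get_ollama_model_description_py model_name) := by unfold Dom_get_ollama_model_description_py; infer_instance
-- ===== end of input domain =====

-- B replaces A's per-family substring tests + if/elif cascade by a single positional sweep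
-- collecting the set of keyword tokens present, then an integer min over the ranks of the
-- present families and one central template instantiation (objective: alternative algorithm).


-- ===== PORT A =====
-- for-with-break over the size list (Python's loop with `break`)
def pvSizeLoop (nl : String) : List String → String
  | [] => ""
  | s :: rest => if PySem.Str.isIn s nl then PySem.Str.upper s else pvSizeLoop nl rest

-- Python's `s or t` on strings (empty string is falsy)
def pvOr (s t : String) : String := if s = "" then t else s

def get_ollama_model_description_py (model_name : String) : String :=
  let nl := PySem.Str.lower model_name
  let sm := pvSizeLoop nl ["0.5b", "1b", "3b", "7b", "8b", "14b", "32b", "70b", "405b"]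
  if PySem.Str.isIn "llama3.3" nl || PySem.Str.isIn "llama-3.3" nl then pvOr (PySem.Str.strip ("Meta Llama 3.3 " ++ sm)) "Meta Llama 3.3"
  else if PySem.Str.isIn "llama3.2" nl || PySem.Str.isIn "llama-3.2" nl then
    (if PySem.Str.isIn "vision" nl then PySem.Str.strip ("Meta Llama 3.2 Vision " ++ sm)
     else pvOr (PySem.Str.strip ("Meta Llama 3.2 " ++ sm)) "Meta Llama 3.2")
  else if PySem.Str.isIn "llama3.1" nl || PySem.Str.isIn "llama-3.1" nl then pvOr (PySem.Str.strip ("Meta Llama 3.1 " ++ sm)) "Meta Llama 3.1"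
  else if PySem.Str.isIn "llama3" nl || PySem.Str.isIn "llama-3" nl then pvOr (PySem.Str.strip ("Meta Llama 3 " ++ sm)) "Meta Llama 3"
  else if PySem.Str.isIn "llama2" nl then pvOr (PySem.Str.strip ("Meta Llama 2 " ++ sm)) "Meta Llama 2 (legacy)"
  else if PySem.Str.isIn "qwen2.5-coder" nl then pvOr (PySem.Str.strip ("Qwen 2.5 Coder " ++ sm)) "Qwen 2.5 Coder"
  else if PySem.Str.isIn "qwen2.5" nl then pvOr (PySem.Str.strip ("Qwen 2.5 " ++ sm)) "Qwen 2.5"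
  else if PySem.Str.isIn "qwen2" nl then pvOr (PySem.Str.strip ("Qwen 2 " ++ sm)) "Qwen 2"
  else if PySem.Str.isIn "mistral" nl && PySem.Str.isIn "nemo" nl then "Mistral Nemo 12B"
  else if PySem.Str.isIn "mistral" nl then pvOr (PySem.Str.strip ("Mistral " ++ sm)) "Mistral"
  else if PySem.Str.isIn "mixtral" nl then (if sm = "" then "Mixtral MoE" else "Mixtral " ++ sm ++ " MoE")
  else if PySem.Str.isIn "gemma2" nl then pvOr (PySem.Str.strip ("Google Gemma 2 " ++ sm)) "Google Gemma 2"
  else if PySem.Str.isIn "gemma" nl then pvOr (PySem.Str.strip ("Google Gemma " ++ sm)) "Google Gemma"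
  else if PySem.Str.isIn "phi3" nl || PySem.Str.isIn "phi-3" nl then pvOr (PySem.Str.strip ("Microsoft Phi-3 " ++ sm)) "Microsoft Phi-3"
  else if PySem.Str.isIn "codestral" nl then "Mistral Codestral (coding)"
  else if PySem.Str.isIn "codegemma" nl then pvOr (PySem.Str.strip ("Google CodeGemma " ++ sm)) "Google CodeGemma"
  else if PySem.Str.isIn "deepseek-coder" nl then pvOr (PySem.Str.strip ("DeepSeek Coder " ++ sm)) "DeepSeek Coder"
  else if PySem.Str.isIn "deepseek" nl then pvOr (PySem.Str.strip ("DeepSeek " ++ sm)) "DeepSeek"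
  else if PySem.Str.isIn "dolphin" nl then "Dolphin (uncensored)"
  else if PySem.Str.isIn "yi" nl then pvOr (PySem.Str.strip ("01.AI Yi " ++ sm)) "01.AI Yi"
  else if PySem.Str.isIn "granite" nl && PySem.Str.isIn "code" nl then pvOr (PySem.Str.strip ("IBM Granite Code " ++ sm)) "IBM Granite Code"
  else if PySem.Str.isIn "granite" nl then pvOr (PySem.Str.strip ("IBM Granite " ++ sm)) "IBM Granite"
  else if PySem.Str.isIn "solar" nl then "Upstage SOLAR"
  else if PySem.Str.isIn "nous" nl || PySem.Str.isIn "hermes" nl then "Nous Hermes"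
  else if PySem.Str.isIn "orca" nl then "Microsoft Orca"
  else if PySem.Str.isIn "vicuna" nl then "Vicuna"
  else if PySem.Str.isIn "falcon" nl then pvOr (PySem.Str.strip ("TII Falcon " ++ sm)) "TII Falcon"
  else if PySem.Str.isIn "starcoder" nl then "StarCoder (coding)"
  else if PySem.Str.isIn "wizardcoder" nl then "WizardCoder (coding)"
  else "Local Ollama model"

-- ===== PORT B =====
def pvBSizes : List String := ["0.5b", "1b", "3b", "7b", "8b", "14b", "32b", "70b", "405b"]

-- _CANON.items() in dict-literal order: keyword -> canonical token
def pvCanon : List (String × String) := [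
  ("llama3.3","llama3.3"), ("llama-3.3","llama3.3"),
  ("llama3.2","llama3.2"), ("llama-3.2","llama3.2"),
  ("llama3.1","llama3.1"), ("llama-3.1","llama3.1"),
  ("llama3","llama3"), ("llama-3","llama3"),
  ("llama2","llama2"),
  ("qwen2.5-coder","qwen2.5-coder"), ("qwen2.5","qwen2.5"), ("qwen2","qwen2"),
  ("mistral","mistral"), ("nemo","nemo"), ("mixtral","mixtral"),
  ("gemma2","gemma2"), ("gemma","gemma"),
  ("phi3","phi3"), ("phi-3","phi3"),
  ("codestral","codestral"), ("codegemma","codegemma"),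
  ("deepseek-coder","deepseek-coder"), ("deepseek","deepseek"),
  ("dolphin","dolphin"), ("yi","yi"),
  ("granite","granite"), ("code","code"), ("vision","vision"),
  ("solar","solar"), ("nous","nous-hermes"), ("hermes","nous-hermes"),
  ("orca","orca"), ("vicuna","vicuna"), ("falcon","falcon"),
  ("starcoder","starcoder"), ("wizardcoder","wizardcoder")]

def pvRank : PySem.Dict String Int := PySem.Dict.ofList [
  ("llama3.3", 0), ("llama3.2-vision", 1), ("llama3.2", 2), ("llama3.1", 3),
  ("llama3", 4), ("llama2", 5), ("qwen2.5-coder", 6), ("qwen2.5", 7), ("qwen2", 8),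
  ("mistral-nemo", 9), ("mistral", 10), ("mixtral", 11), ("gemma2", 12), ("gemma", 13),
  ("phi3", 14), ("codestral", 15), ("codegemma", 16), ("deepseek-coder", 17),
  ("deepseek", 18), ("dolphin", 19), ("yi", 20), ("granite-code", 21), ("granite", 22),
  ("solar", 23), ("nous-hermes", 24), ("orca", 25), ("vicuna", 26), ("falcon", 27),
  ("starcoder", 28), ("wizardcoder", 29)]

def pvDesc : List String := [
  "Meta Llama 3.3{s}", "Meta Llama 3.2 Vision{s}", "Meta Llama 3.2{s}",
  "Meta Llama 3.1{s}", "Meta Llama 3{s}", "Meta Llama 2{s}",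
  "Qwen 2.5 Coder{s}", "Qwen 2.5{s}", "Qwen 2{s}", "Mistral Nemo 12B",
  "Mistral{s}", "Mixtral{s} MoE", "Google Gemma 2{s}", "Google Gemma{s}",
  "Microsoft Phi-3{s}", "Mistral Codestral (coding)", "Google CodeGemma{s}",
  "DeepSeek Coder{s}", "DeepSeek{s}", "Dolphin (uncensored)", "01.AI Yi{s}",
  "IBM Granite Code{s}", "IBM Granite{s}", "Upstage SOLAR", "Nous Hermes",
  "Microsoft Orca", "Vicuna", "TII Falcon{s}", "StarCoder (coding)",
  "WizardCoder (coding)"]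

-- one index of the sweep: `name_lower.startswith(kw, i)` for 0 ≤ i < len is, exactly,
-- "kw is a prefix of the suffix of name_lower at i" (hand port of the two-argument startswith)
-- 'for b in l: if q(b): toks.add(f(b))'
def pvCondAddFold {β : Type} (l : List β) (q : β → Bool) (f : β → String) (s : PySem.Set String) : PySem.Set String :=
  l.foldl (fun acc b => if q b then PySem.Set.add acc (f b) else acc) s

def pvScanAt (nl : List Char) (i : Nat) (toks : PySem.Set String) : PySem.Set String :=
  let toks := pvCondAddFold pvCanon (fun p => PySem.Chars.startswith (nl.drop i) p.1.toList) Prod.snd toks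
  pvCondAddFold pvBSizes (fun sz => PySem.Chars.startswith (nl.drop i) sz.toList) (fun sz => sz) toks

-- `for i in range(len(name_lower))` (range(n) enumerates 0,…,n-1)
def pvToks (nl : List Char) : PySem.Set String :=
  (List.range nl.length).foldl (fun acc i => pvScanAt nl i acc) PySem.Set.empty

-- next((sz.upper() for sz in _SIZES if sz in tokens), "")
def pvSizeOf (toks : PySem.Set String) : String :=
  ((pvBSizes.find? (fun sz => PySem.Set.contains toks sz)).map PySem.Str.upper).getD ""

def pvAddComposites (toks : PySem.Set String) : PySem.Set String :=
  let toks := if PySem.Set.contains toks "mistral" && PySem.Set.contains toks "nemo" then PySem.Set.add toks "mistral-nemo" else toks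
  let toks := if PySem.Set.contains toks "granite" && PySem.Set.contains toks "code" then PySem.Set.add toks "granite-code" else toks
  if PySem.Set.contains toks "llama3.2" && PySem.Set.contains toks "vision" then PySem.Set.add toks "llama3.2-vision" else toks

def get_ollama_model_description_py_alt (model_name : String) : String :=
  let nl := PySem.Str.lower model_name
  let toks := pvToks nl.toList
  let size := pvSizeOf toks
  let toks := pvAddComposites toks
  -- [_RANK[t] for t in tokens if t in _RANK]; only its emptiness and integer min are used,
  -- both independent of the set's iteration order
  let ranks := toks.filterMap (fun t => PySem.Dict.get? pvRank t)
  -- `if not ranks: return "Local Ollama model"` = the `none` case of min over ranks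
  match PySem.List.min? ranks (fun x => x) with
  | none => "Local Ollama model"
  | some m =>
      -- _DESC[min(ranks)]: every rank is in [0,29] = range of _DESC, so the index is in range
      PySem.Str.replace (PySem.List.pyGetD pvDesc m "") "{s}" (if size = "" then "" else " " ++ size)

-- ===== PRECONDITION & SPEC =====
def Spec_get_ollama_model_description_py (model_name : String) (out : String) : Prop := out = get_ollama_model_description_py_alt model_name
instance (model_name : String) (out : String) : Decidable (Spec_get_ollama_model_description_py model_name out) := by unfold Spec_get_ollama_model_description_py; infer_instance

-- ===== CLAIM (what is proved, stated in full; the proofs are below) =====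
def Claim_equal_get_ollama_model_description_py : Prop := ∀ (model_name : String), Dom_get_ollama_model_description_py model_name → Spec_get_ollama_model_description_py model_name (get_ollama_model_description_py model_name)

-- ===== LEMMAS AND PROOFS =====

theorem pv_mem_condAddFold {β : Type} (l : List β) (q : β → Bool) (f : β → String) (s : PySem.Set String) (t : String) :
    t ∈ pvCondAddFold l q f s ↔ t ∈ s ∨ ∃ b ∈ l, q b = true ∧ t = f b := by
  unfold pvCondAddFold
  induction l generalizing s with
  | nil => simp
  | cons b l ih =>
    simp only [List.foldl_cons]
    by_cases hb : q b = true
    · simp only [if_pos hb, ih, PySem.Set.mem_add, List.mem_cons]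
      constructor
      · rintro ((h | rfl) | ⟨c, hc, hq, rfl⟩)
        · exact Or.inl h
        · exact Or.inr ⟨b, Or.inl rfl, hb, rfl⟩
        · exact Or.inr ⟨c, Or.inr hc, hq, rfl⟩
      · rintro (h | ⟨c, (rfl | hc), hq, rfl⟩)
        · exact Or.inl (Or.inl h)
        · exact Or.inl (Or.inr rfl)
        · exact Or.inr ⟨c, hc, hq, rfl⟩
    · simp only [if_neg hb, ih, List.mem_cons]
      constructor
      · rintro (h | ⟨c, hc, hq, rfl⟩)
        · exact Or.inl h
        · exact Or.inr ⟨c, Or.inr hc, hq, rfl⟩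
      · rintro (h | ⟨c, (rfl | hc), hq, rfl⟩)
        · exact Or.inl h
        · exact (hb hq).elim
        · exact Or.inr ⟨c, hc, hq, rfl⟩

def pvAll : List (String × String) := pvCanon ++ pvBSizes.map (fun s => (s, s))

theorem pvAll_fst_ne (p : String × String) (hp : p ∈ pvAll) : p.1.toList ≠ [] := by
  fin_cases hp <;> decide

theorem pv_mem_scanAt (nl : List Char) (i : Nat) (toks : PySem.Set String) (t : String) :
    t ∈ pvScanAt nl i toks ↔ t ∈ toks ∨ ∃ p ∈ pvAll, PySem.Chars.startswith (nl.drop i) p.1.toList = true ∧ t = p.2 := by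
  unfold pvScanAt pvAll
  rw [pv_mem_condAddFold, pv_mem_condAddFold]
  simp only [List.mem_append, List.mem_map]
  constructor
  · rintro ((h | ⟨p, hp, hq, rfl⟩) | ⟨b, hb, hq, heq⟩)
    · exact Or.inl h
    · exact Or.inr ⟨p, Or.inl hp, hq, rfl⟩
    · exact Or.inr ⟨(b, b), Or.inr ⟨b, hb, rfl⟩, hq, heq⟩
  · rintro (h | ⟨p, hp | ⟨b, hb, heq⟩, hq, rfl⟩)
    · exact Or.inl (Or.inl h)
    · exact Or.inl (Or.inr ⟨p, hp, hq, rfl⟩)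
    · exact Or.inr ⟨b, hb, by rw [← heq] at hq ⊢; exact ⟨hq, rfl⟩⟩

theorem pv_exists_sw (sub s : List Char) (h : sub ≠ []) :
    (∃ i, i ∈ List.range s.length ∧ PySem.Chars.startswith (s.drop i) sub = true) ↔ PySem.Chars.isIn sub s = true := by
  rw [← PySem.Chars.exists_prefix_drop_iff_isIn]
  constructor
  · rintro ⟨i, _, hp⟩
    exact ⟨i, (PySem.Chars.startswith_iff _ _).mp hp⟩
  · rintro ⟨j, hp⟩
    rcases Nat.lt_or_ge j s.length with hj | hj
    · exact ⟨j, List.mem_range.mpr hj, (PySem.Chars.startswith_iff _ _).mpr hp⟩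
    · rw [List.drop_eq_nil_of_le hj] at hp
      exact absurd (List.prefix_nil.mp hp) h

theorem pv_mem_toks (nl : List Char) (t : String) :
    t ∈ pvToks nl ↔ ∃ p ∈ pvAll, t = p.2 ∧ PySem.Chars.isIn p.1.toList nl = true := by
  unfold pvToks
  have main : ∀ (l : List Nat) (s : PySem.Set String),
      t ∈ l.foldl (fun acc i => pvScanAt nl i acc) s ↔
      t ∈ s ∨ ∃ i ∈ l, ∃ p ∈ pvAll, PySem.Chars.startswith (nl.drop i) p.1.toList = true ∧ t = p.2 := by
    intro l
    induction l with
    | nil => simp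
    | cons i l ih =>
      intro s
      simp only [List.foldl_cons, ih, pv_mem_scanAt, List.mem_cons]
      constructor
      · rintro ((h | ⟨p, hp, hq, rfl⟩) | ⟨j, hj, p, hp, hq, rfl⟩)
        · exact Or.inl h
        · exact Or.inr ⟨i, Or.inl rfl, p, hp, hq, rfl⟩
        · exact Or.inr ⟨j, Or.inr hj, p, hp, hq, rfl⟩
      · rintro (h | ⟨j, (rfl | hj), p, hp, hq, rfl⟩)
        · exact Or.inl (Or.inl h)
        · exact Or.inl (Or.inr ⟨p, hp, hq, rfl⟩)
        · exact Or.inr ⟨j, hj, p, hp, hq, rfl⟩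
  rw [main]
  constructor
  · rintro (h | ⟨i, hi, p, hp, hq, rfl⟩)
    · simp [PySem.Set.empty] at h
    · exact ⟨p, hp, rfl, (pv_exists_sw p.1.toList nl (pvAll_fst_ne p hp)).mp ⟨i, hi, hq⟩⟩
  · rintro ⟨p, hp, rfl, hin⟩
    obtain ⟨i, hi, hq⟩ := (pv_exists_sw p.1.toList nl (pvAll_fst_ne p hp)).mpr hin
    exact Or.inr ⟨i, hi, p, hp, hq, rfl⟩
def pvCond (nl : String) : Nat → Bool
  | 0 => (PySem.Str.isIn "llama3.3" nl || PySem.Str.isIn "llama-3.3" nl)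
  | 1 => (PySem.Str.isIn "llama3.2" nl || PySem.Str.isIn "llama-3.2" nl) && PySem.Str.isIn "vision" nl
  | 2 => (PySem.Str.isIn "llama3.2" nl || PySem.Str.isIn "llama-3.2" nl)
  | 3 => (PySem.Str.isIn "llama3.1" nl || PySem.Str.isIn "llama-3.1" nl)
  | 4 => (PySem.Str.isIn "llama3" nl || PySem.Str.isIn "llama-3" nl)
  | 5 => PySem.Str.isIn "llama2" nl
  | 6 => PySem.Str.isIn "qwen2.5-coder" nl
  | 7 => PySem.Str.isIn "qwen2.5" nl
  | 8 => PySem.Str.isIn "qwen2" nl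
  | 9 => PySem.Str.isIn "mistral" nl && PySem.Str.isIn "nemo" nl
  | 10 => PySem.Str.isIn "mistral" nl
  | 11 => PySem.Str.isIn "mixtral" nl
  | 12 => PySem.Str.isIn "gemma2" nl
  | 13 => PySem.Str.isIn "gemma" nl
  | 14 => (PySem.Str.isIn "phi3" nl || PySem.Str.isIn "phi-3" nl)
  | 15 => PySem.Str.isIn "codestral" nl
  | 16 => PySem.Str.isIn "codegemma" nl
  | 17 => PySem.Str.isIn "deepseek-coder" nl
  | 18 => PySem.Str.isIn "deepseek" nl
  | 19 => PySem.Str.isIn "dolphin" nl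
  | 20 => PySem.Str.isIn "yi" nl
  | 21 => PySem.Str.isIn "granite" nl && PySem.Str.isIn "code" nl
  | 22 => PySem.Str.isIn "granite" nl
  | 23 => PySem.Str.isIn "solar" nl
  | 24 => (PySem.Str.isIn "nous" nl || PySem.Str.isIn "hermes" nl)
  | 25 => PySem.Str.isIn "orca" nl
  | 26 => PySem.Str.isIn "vicuna" nl
  | 27 => PySem.Str.isIn "falcon" nl
  | 28 => PySem.Str.isIn "starcoder" nl
  | 29 => PySem.Str.isIn "wizardcoder" nl
  | _ => false

theorem pv_tokP_llama33 (nl : String) : ("llama3.3" ∈ pvToks nl.toList) ↔ (PySem.Str.isIn "llama3.3" nl || PySem.Str.isIn "llama-3.3" nl) = true := by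
  rw [pv_mem_toks]; simp [pvAll, pvCanon, pvBSizes]

theorem pv_tokP_llama32 (nl : String) : ("llama3.2" ∈ pvToks nl.toList) ↔ (PySem.Str.isIn "llama3.2" nl || PySem.Str.isIn "llama-3.2" nl) = true := by
  rw [pv_mem_toks]; simp [pvAll, pvCanon, pvBSizes]

theorem pv_tokP_llama31 (nl : String) : ("llama3.1" ∈ pvToks nl.toList) ↔ (PySem.Str.isIn "llama3.1" nl || PySem.Str.isIn "llama-3.1" nl) = true := by
  rw [pv_mem_toks]; simp [pvAll, pvCanon, pvBSizes]

theorem pv_tokP_llama3 (nl : String) : ("llama3" ∈ pvToks nl.toList) ↔ (PySem.Str.isIn "llama3" nl || PySem.Str.isIn "llama-3" nl) = true := by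
  rw [pv_mem_toks]; simp [pvAll, pvCanon, pvBSizes]

theorem pv_tokP_llama2 (nl : String) : ("llama2" ∈ pvToks nl.toList) ↔ (PySem.Str.isIn "llama2" nl) = true := by
  rw [pv_mem_toks]; simp [pvAll, pvCanon, pvBSizes]

theorem pv_tokP_qwen25_coder (nl : String) : ("qwen2.5-coder" ∈ pvToks nl.toList) ↔ (PySem.Str.isIn "qwen2.5-coder" nl) = true := by
  rw [pv_mem_toks]; simp [pvAll, pvCanon, pvBSizes]

theorem pv_tokP_qwen25 (nl : String) : ("qwen2.5" ∈ pvToks nl.toList) ↔ (PySem.Str.isIn "qwen2.5" nl) = true := by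
  rw [pv_mem_toks]; simp [pvAll, pvCanon, pvBSizes]

theorem pv_tokP_qwen2 (nl : String) : ("qwen2" ∈ pvToks nl.toList) ↔ (PySem.Str.isIn "qwen2" nl) = true := by
  rw [pv_mem_toks]; simp [pvAll, pvCanon, pvBSizes]

theorem pv_tokP_mistral (nl : String) : ("mistral" ∈ pvToks nl.toList) ↔ (PySem.Str.isIn "mistral" nl) = true := by
  rw [pv_mem_toks]; simp [pvAll, pvCanon, pvBSizes]

theorem pv_tokP_mixtral (nl : String) : ("mixtral" ∈ pvToks nl.toList) ↔ (PySem.Str.isIn "mixtral" nl) = true := by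
  rw [pv_mem_toks]; simp [pvAll, pvCanon, pvBSizes]

theorem pv_tokP_gemma2 (nl : String) : ("gemma2" ∈ pvToks nl.toList) ↔ (PySem.Str.isIn "gemma2" nl) = true := by
  rw [pv_mem_toks]; simp [pvAll, pvCanon, pvBSizes]

theorem pv_tokP_gemma (nl : String) : ("gemma" ∈ pvToks nl.toList) ↔ (PySem.Str.isIn "gemma" nl) = true := by
  rw [pv_mem_toks]; simp [pvAll, pvCanon, pvBSizes]

theorem pv_tokP_phi3 (nl : String) : ("phi3" ∈ pvToks nl.toList) ↔ (PySem.Str.isIn "phi3" nl || PySem.Str.isIn "phi-3" nl) = true := by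
  rw [pv_mem_toks]; simp [pvAll, pvCanon, pvBSizes]

theorem pv_tokP_codestral (nl : String) : ("codestral" ∈ pvToks nl.toList) ↔ (PySem.Str.isIn "codestral" nl) = true := by
  rw [pv_mem_toks]; simp [pvAll, pvCanon, pvBSizes]

theorem pv_tokP_codegemma (nl : String) : ("codegemma" ∈ pvToks nl.toList) ↔ (PySem.Str.isIn "codegemma" nl) = true := by
  rw [pv_mem_toks]; simp [pvAll, pvCanon, pvBSizes]

theorem pv_tokP_deepseek_coder (nl : String) : ("deepseek-coder" ∈ pvToks nl.toList) ↔ (PySem.Str.isIn "deepseek-coder" nl) = true := by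
  rw [pv_mem_toks]; simp [pvAll, pvCanon, pvBSizes]

theorem pv_tokP_deepseek (nl : String) : ("deepseek" ∈ pvToks nl.toList) ↔ (PySem.Str.isIn "deepseek" nl) = true := by
  rw [pv_mem_toks]; simp [pvAll, pvCanon, pvBSizes]

theorem pv_tokP_dolphin (nl : String) : ("dolphin" ∈ pvToks nl.toList) ↔ (PySem.Str.isIn "dolphin" nl) = true := by
  rw [pv_mem_toks]; simp [pvAll, pvCanon, pvBSizes]

theorem pv_tokP_yi (nl : String) : ("yi" ∈ pvToks nl.toList) ↔ (PySem.Str.isIn "yi" nl) = true := by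
  rw [pv_mem_toks]; simp [pvAll, pvCanon, pvBSizes]

theorem pv_tokP_granite (nl : String) : ("granite" ∈ pvToks nl.toList) ↔ (PySem.Str.isIn "granite" nl) = true := by
  rw [pv_mem_toks]; simp [pvAll, pvCanon, pvBSizes]

theorem pv_tokP_solar (nl : String) : ("solar" ∈ pvToks nl.toList) ↔ (PySem.Str.isIn "solar" nl) = true := by
  rw [pv_mem_toks]; simp [pvAll, pvCanon, pvBSizes]

theorem pv_tokP_nous_hermes (nl : String) : ("nous-hermes" ∈ pvToks nl.toList) ↔ (PySem.Str.isIn "nous" nl || PySem.Str.isIn "hermes" nl) = true := by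
  rw [pv_mem_toks]; simp [pvAll, pvCanon, pvBSizes]

theorem pv_tokP_orca (nl : String) : ("orca" ∈ pvToks nl.toList) ↔ (PySem.Str.isIn "orca" nl) = true := by
  rw [pv_mem_toks]; simp [pvAll, pvCanon, pvBSizes]

theorem pv_tokP_vicuna (nl : String) : ("vicuna" ∈ pvToks nl.toList) ↔ (PySem.Str.isIn "vicuna" nl) = true := by
  rw [pv_mem_toks]; simp [pvAll, pvCanon, pvBSizes]

theorem pv_tokP_falcon (nl : String) : ("falcon" ∈ pvToks nl.toList) ↔ (PySem.Str.isIn "falcon" nl) = true := by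
  rw [pv_mem_toks]; simp [pvAll, pvCanon, pvBSizes]

theorem pv_tokP_starcoder (nl : String) : ("starcoder" ∈ pvToks nl.toList) ↔ (PySem.Str.isIn "starcoder" nl) = true := by
  rw [pv_mem_toks]; simp [pvAll, pvCanon, pvBSizes]

theorem pv_tokP_wizardcoder (nl : String) : ("wizardcoder" ∈ pvToks nl.toList) ↔ (PySem.Str.isIn "wizardcoder" nl) = true := by
  rw [pv_mem_toks]; simp [pvAll, pvCanon, pvBSizes]

theorem pv_tokP_nemo (nl : String) : ("nemo" ∈ pvToks nl.toList) ↔ PySem.Str.isIn "nemo" nl = true := by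
  rw [pv_mem_toks]; simp [pvAll, pvCanon, pvBSizes]

theorem pv_tokP_code (nl : String) : ("code" ∈ pvToks nl.toList) ↔ PySem.Str.isIn "code" nl = true := by
  rw [pv_mem_toks]; simp [pvAll, pvCanon, pvBSizes]

theorem pv_tokP_vision (nl : String) : ("vision" ∈ pvToks nl.toList) ↔ PySem.Str.isIn "vision" nl = true := by
  rw [pv_mem_toks]; simp [pvAll, pvCanon, pvBSizes]

theorem pv_tokP_05b (nl : String) : ("0.5b" ∈ pvToks nl.toList) ↔ PySem.Str.isIn "0.5b" nl = true := by
  rw [pv_mem_toks]; simp [pvAll, pvCanon, pvBSizes]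

theorem pv_tokP_1b (nl : String) : ("1b" ∈ pvToks nl.toList) ↔ PySem.Str.isIn "1b" nl = true := by
  rw [pv_mem_toks]; simp [pvAll, pvCanon, pvBSizes]

theorem pv_tokP_3b (nl : String) : ("3b" ∈ pvToks nl.toList) ↔ PySem.Str.isIn "3b" nl = true := by
  rw [pv_mem_toks]; simp [pvAll, pvCanon, pvBSizes]

theorem pv_tokP_7b (nl : String) : ("7b" ∈ pvToks nl.toList) ↔ PySem.Str.isIn "7b" nl = true := by
  rw [pv_mem_toks]; simp [pvAll, pvCanon, pvBSizes]

theorem pv_tokP_8b (nl : String) : ("8b" ∈ pvToks nl.toList) ↔ PySem.Str.isIn "8b" nl = true := by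
  rw [pv_mem_toks]; simp [pvAll, pvCanon, pvBSizes]

theorem pv_tokP_14b (nl : String) : ("14b" ∈ pvToks nl.toList) ↔ PySem.Str.isIn "14b" nl = true := by
  rw [pv_mem_toks]; simp [pvAll, pvCanon, pvBSizes]

theorem pv_tokP_32b (nl : String) : ("32b" ∈ pvToks nl.toList) ↔ PySem.Str.isIn "32b" nl = true := by
  rw [pv_mem_toks]; simp [pvAll, pvCanon, pvBSizes]

theorem pv_tokP_70b (nl : String) : ("70b" ∈ pvToks nl.toList) ↔ PySem.Str.isIn "70b" nl = true := by
  rw [pv_mem_toks]; simp [pvAll, pvCanon, pvBSizes]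

theorem pv_tokP_405b (nl : String) : ("405b" ∈ pvToks nl.toList) ↔ PySem.Str.isIn "405b" nl = true := by
  rw [pv_mem_toks]; simp [pvAll, pvCanon, pvBSizes]

theorem pv_tokP_not_mistral_nemo (nl : String) : ¬ ("mistral-nemo" ∈ pvToks nl.toList) := by
  rw [pv_mem_toks]; simp [pvAll, pvCanon, pvBSizes]

theorem pv_tokP_not_granite_code (nl : String) : ¬ ("granite-code" ∈ pvToks nl.toList) := by
  rw [pv_mem_toks]; simp [pvAll, pvCanon, pvBSizes]

theorem pv_tokP_not_llama32_vision (nl : String) : ¬ ("llama3.2-vision" ∈ pvToks nl.toList) := by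
  rw [pv_mem_toks]; simp [pvAll, pvCanon, pvBSizes]

theorem pv_bool_eq_of_iff {a b : Bool} (h : a = true ↔ b = true) : a = b := by
  cases a <;> cases b <;> simp_all

theorem pv_contains_condAdd (s : PySem.Set String) (c : Bool) (x y : String) (h : y ≠ x) :
    PySem.Set.contains (if c then PySem.Set.add s x else s) y = PySem.Set.contains s y := by
  split_ifs with hc
  · apply pv_bool_eq_of_iff
    rw [PySem.Set.contains_iff, PySem.Set.contains_iff, PySem.Set.mem_add]
    simp [h]
  · rfl

theorem pv_mem_condAdd (s : PySem.Set String) (c : Bool) (x t : String) :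
    t ∈ (if c then PySem.Set.add s x else s) ↔ t ∈ s ∨ (c = true ∧ t = x) := by
  split_ifs with hc <;> simp [PySem.Set.mem_add, hc]

theorem pv_mem_addComposites (toks : PySem.Set String) (t : String) :
    t ∈ pvAddComposites toks ↔ t ∈ toks
      ∨ (("mistral" ∈ toks ∧ "nemo" ∈ toks) ∧ t = "mistral-nemo")
      ∨ (("granite" ∈ toks ∧ "code" ∈ toks) ∧ t = "granite-code")
      ∨ (("llama3.2" ∈ toks ∧ "vision" ∈ toks) ∧ t = "llama3.2-vision") := by
  simp only [pvAddComposites]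
  rw [pv_mem_condAdd, pv_mem_condAdd, pv_mem_condAdd]
  rw [pv_contains_condAdd _ _ _ _ (by decide), pv_contains_condAdd _ _ _ _ (by decide),
      pv_contains_condAdd _ _ _ _ (by decide), pv_contains_condAdd _ _ _ _ (by decide),
      pv_contains_condAdd _ _ _ _ (by decide), pv_contains_condAdd _ _ _ _ (by decide)]
  simp only [Bool.and_eq_true, PySem.Set.contains_iff]
  tauto
theorem pv_T0 (nl : String) : ("llama3.3" ∈ pvAddComposites (pvToks nl.toList)) ↔ pvCond nl 0 = true := by
  rw [pv_mem_addComposites]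
  simp [pv_tokP_llama33, pvCond]

theorem pv_T2 (nl : String) : ("llama3.2" ∈ pvAddComposites (pvToks nl.toList)) ↔ pvCond nl 2 = true := by
  rw [pv_mem_addComposites]
  simp [pv_tokP_llama32, pvCond]

theorem pv_T3 (nl : String) : ("llama3.1" ∈ pvAddComposites (pvToks nl.toList)) ↔ pvCond nl 3 = true := by
  rw [pv_mem_addComposites]
  simp [pv_tokP_llama31, pvCond]

theorem pv_T4 (nl : String) : ("llama3" ∈ pvAddComposites (pvToks nl.toList)) ↔ pvCond nl 4 = true := by
  rw [pv_mem_addComposites]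
  simp [pv_tokP_llama3, pvCond]

theorem pv_T5 (nl : String) : ("llama2" ∈ pvAddComposites (pvToks nl.toList)) ↔ pvCond nl 5 = true := by
  rw [pv_mem_addComposites]
  simp [pv_tokP_llama2, pvCond]

theorem pv_T6 (nl : String) : ("qwen2.5-coder" ∈ pvAddComposites (pvToks nl.toList)) ↔ pvCond nl 6 = true := by
  rw [pv_mem_addComposites]
  simp [pv_tokP_qwen25_coder, pvCond]

theorem pv_T7 (nl : String) : ("qwen2.5" ∈ pvAddComposites (pvToks nl.toList)) ↔ pvCond nl 7 = true := by
  rw [pv_mem_addComposites]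
  simp [pv_tokP_qwen25, pvCond]

theorem pv_T8 (nl : String) : ("qwen2" ∈ pvAddComposites (pvToks nl.toList)) ↔ pvCond nl 8 = true := by
  rw [pv_mem_addComposites]
  simp [pv_tokP_qwen2, pvCond]

theorem pv_T10 (nl : String) : ("mistral" ∈ pvAddComposites (pvToks nl.toList)) ↔ pvCond nl 10 = true := by
  rw [pv_mem_addComposites]
  simp [pv_tokP_mistral, pvCond]

theorem pv_T11 (nl : String) : ("mixtral" ∈ pvAddComposites (pvToks nl.toList)) ↔ pvCond nl 11 = true := by
  rw [pv_mem_addComposites]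
  simp [pv_tokP_mixtral, pvCond]

theorem pv_T12 (nl : String) : ("gemma2" ∈ pvAddComposites (pvToks nl.toList)) ↔ pvCond nl 12 = true := by
  rw [pv_mem_addComposites]
  simp [pv_tokP_gemma2, pvCond]

theorem pv_T13 (nl : String) : ("gemma" ∈ pvAddComposites (pvToks nl.toList)) ↔ pvCond nl 13 = true := by
  rw [pv_mem_addComposites]
  simp [pv_tokP_gemma, pvCond]

theorem pv_T14 (nl : String) : ("phi3" ∈ pvAddComposites (pvToks nl.toList)) ↔ pvCond nl 14 = true := by
  rw [pv_mem_addComposites]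
  simp [pv_tokP_phi3, pvCond]

theorem pv_T15 (nl : String) : ("codestral" ∈ pvAddComposites (pvToks nl.toList)) ↔ pvCond nl 15 = true := by
  rw [pv_mem_addComposites]
  simp [pv_tokP_codestral, pvCond]

theorem pv_T16 (nl : String) : ("codegemma" ∈ pvAddComposites (pvToks nl.toList)) ↔ pvCond nl 16 = true := by
  rw [pv_mem_addComposites]
  simp [pv_tokP_codegemma, pvCond]

theorem pv_T17 (nl : String) : ("deepseek-coder" ∈ pvAddComposites (pvToks nl.toList)) ↔ pvCond nl 17 = true := by
  rw [pv_mem_addComposites]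
  simp [pv_tokP_deepseek_coder, pvCond]

theorem pv_T18 (nl : String) : ("deepseek" ∈ pvAddComposites (pvToks nl.toList)) ↔ pvCond nl 18 = true := by
  rw [pv_mem_addComposites]
  simp [pv_tokP_deepseek, pvCond]

theorem pv_T19 (nl : String) : ("dolphin" ∈ pvAddComposites (pvToks nl.toList)) ↔ pvCond nl 19 = true := by
  rw [pv_mem_addComposites]
  simp [pv_tokP_dolphin, pvCond]

theorem pv_T20 (nl : String) : ("yi" ∈ pvAddComposites (pvToks nl.toList)) ↔ pvCond nl 20 = true := by
  rw [pv_mem_addComposites]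
  simp [pv_tokP_yi, pvCond]

theorem pv_T22 (nl : String) : ("granite" ∈ pvAddComposites (pvToks nl.toList)) ↔ pvCond nl 22 = true := by
  rw [pv_mem_addComposites]
  simp [pv_tokP_granite, pvCond]

theorem pv_T23 (nl : String) : ("solar" ∈ pvAddComposites (pvToks nl.toList)) ↔ pvCond nl 23 = true := by
  rw [pv_mem_addComposites]
  simp [pv_tokP_solar, pvCond]

theorem pv_T24 (nl : String) : ("nous-hermes" ∈ pvAddComposites (pvToks nl.toList)) ↔ pvCond nl 24 = true := by
  rw [pv_mem_addComposites]
  simp [pv_tokP_nous_hermes, pvCond]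

theorem pv_T25 (nl : String) : ("orca" ∈ pvAddComposites (pvToks nl.toList)) ↔ pvCond nl 25 = true := by
  rw [pv_mem_addComposites]
  simp [pv_tokP_orca, pvCond]

theorem pv_T26 (nl : String) : ("vicuna" ∈ pvAddComposites (pvToks nl.toList)) ↔ pvCond nl 26 = true := by
  rw [pv_mem_addComposites]
  simp [pv_tokP_vicuna, pvCond]

theorem pv_T27 (nl : String) : ("falcon" ∈ pvAddComposites (pvToks nl.toList)) ↔ pvCond nl 27 = true := by
  rw [pv_mem_addComposites]
  simp [pv_tokP_falcon, pvCond]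

theorem pv_T28 (nl : String) : ("starcoder" ∈ pvAddComposites (pvToks nl.toList)) ↔ pvCond nl 28 = true := by
  rw [pv_mem_addComposites]
  simp [pv_tokP_starcoder, pvCond]

theorem pv_T29 (nl : String) : ("wizardcoder" ∈ pvAddComposites (pvToks nl.toList)) ↔ pvCond nl 29 = true := by
  rw [pv_mem_addComposites]
  simp [pv_tokP_wizardcoder, pvCond]

theorem pv_T9 (nl : String) : ("mistral-nemo" ∈ pvAddComposites (pvToks nl.toList)) ↔ pvCond nl 9 = true := by
  rw [pv_mem_addComposites]
  simp [pv_tokP_not_mistral_nemo, pv_tokP_mistral, pv_tokP_nemo, pvCond, Bool.and_eq_true]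

theorem pv_T21 (nl : String) : ("granite-code" ∈ pvAddComposites (pvToks nl.toList)) ↔ pvCond nl 21 = true := by
  rw [pv_mem_addComposites]
  simp [pv_tokP_not_granite_code, pv_tokP_granite, pv_tokP_code, pvCond, Bool.and_eq_true]

theorem pv_T1 (nl : String) : ("llama3.2-vision" ∈ pvAddComposites (pvToks nl.toList)) ↔ pvCond nl 1 = true := by
  rw [pv_mem_addComposites]
  simp [pv_tokP_not_llama32_vision, pv_tokP_llama32, pv_tokP_vision, pvCond, Bool.and_eq_true]

def pvUniv : List String := ["llama3.3", "llama3.2", "llama3.1", "llama3", "llama2", "qwen2.5-coder", "qwen2.5", "qwen2", "mistral", "mixtral", "gemma2", "gemma", "phi3", "codestral", "codegemma", "deepseek-coder", "deepseek", "dolphin", "yi", "granite", "solar", "nous-hermes", "orca", "vicuna", "falcon", "starcoder", "wizardcoder", "nemo", "code", "vision", "0.5b", "1b", "3b", "7b", "8b", "14b", "32b", "70b", "405b", "mistral-nemo", "granite-code", "llama3.2-vision"]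

theorem pv_toks3_univ (nl : String) (t : String) (ht : t ∈ pvAddComposites (pvToks nl.toList)) : t ∈ pvUniv := by
  rw [pv_mem_addComposites] at ht
  rcases ht with ht | ⟨-, rfl⟩ | ⟨-, rfl⟩ | ⟨-, rfl⟩
  · rw [pv_mem_toks] at ht
    obtain ⟨p, hp, rfl, -⟩ := ht
    fin_cases hp <;> simp [pvUniv]
  all_goals simp [pvUniv]

set_option maxHeartbeats 3200000 in
theorem pv_mem_ranks (nl : String) (j : Int) :
    j ∈ (pvAddComposites (pvToks nl.toList)).filterMap (fun t => PySem.Dict.get? pvRank t) ↔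
    ∃ k : Nat, k < 30 ∧ pvCond nl k = true ∧ j = (k : Int) := by
  rw [List.mem_filterMap]
  constructor
  · rintro ⟨t, ht, hg⟩
    have hu := pv_toks3_univ nl t ht
    fin_cases hu
    · rw [show PySem.Dict.get? pvRank "llama3.3" = some (0 : Int) from by decide] at hg
      injection hg with h
      exact ⟨0, by omega, (pv_T0 nl).mp ht, by omega⟩
    · rw [show PySem.Dict.get? pvRank "llama3.2" = some (2 : Int) from by decide] at hg
      injection hg with h
      exact ⟨2, by omega, (pv_T2 nl).mp ht, by omega⟩
    · rw [show PySem.Dict.get? pvRank "llama3.1" = some (3 : Int) from by decide] at hg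
      injection hg with h
      exact ⟨3, by omega, (pv_T3 nl).mp ht, by omega⟩
    · rw [show PySem.Dict.get? pvRank "llama3" = some (4 : Int) from by decide] at hg
      injection hg with h
      exact ⟨4, by omega, (pv_T4 nl).mp ht, by omega⟩
    · rw [show PySem.Dict.get? pvRank "llama2" = some (5 : Int) from by decide] at hg
      injection hg with h
      exact ⟨5, by omega, (pv_T5 nl).mp ht, by omega⟩
    · rw [show PySem.Dict.get? pvRank "qwen2.5-coder" = some (6 : Int) from by decide] at hg
      injection hg with h
      exact ⟨6, by omega, (pv_T6 nl).mp ht, by omega⟩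
    · rw [show PySem.Dict.get? pvRank "qwen2.5" = some (7 : Int) from by decide] at hg
      injection hg with h
      exact ⟨7, by omega, (pv_T7 nl).mp ht, by omega⟩
    · rw [show PySem.Dict.get? pvRank "qwen2" = some (8 : Int) from by decide] at hg
      injection hg with h
      exact ⟨8, by omega, (pv_T8 nl).mp ht, by omega⟩
    · rw [show PySem.Dict.get? pvRank "mistral" = some (10 : Int) from by decide] at hg
      injection hg with h
      exact ⟨10, by omega, (pv_T10 nl).mp ht, by omega⟩
    · rw [show PySem.Dict.get? pvRank "mixtral" = some (11 : Int) from by decide] at hg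
      injection hg with h
      exact ⟨11, by omega, (pv_T11 nl).mp ht, by omega⟩
    · rw [show PySem.Dict.get? pvRank "gemma2" = some (12 : Int) from by decide] at hg
      injection hg with h
      exact ⟨12, by omega, (pv_T12 nl).mp ht, by omega⟩
    · rw [show PySem.Dict.get? pvRank "gemma" = some (13 : Int) from by decide] at hg
      injection hg with h
      exact ⟨13, by omega, (pv_T13 nl).mp ht, by omega⟩
    · rw [show PySem.Dict.get? pvRank "phi3" = some (14 : Int) from by decide] at hg
      injection hg with h
      exact ⟨14, by omega, (pv_T14 nl).mp ht, by omega⟩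
    · rw [show PySem.Dict.get? pvRank "codestral" = some (15 : Int) from by decide] at hg
      injection hg with h
      exact ⟨15, by omega, (pv_T15 nl).mp ht, by omega⟩
    · rw [show PySem.Dict.get? pvRank "codegemma" = some (16 : Int) from by decide] at hg
      injection hg with h
      exact ⟨16, by omega, (pv_T16 nl).mp ht, by omega⟩
    · rw [show PySem.Dict.get? pvRank "deepseek-coder" = some (17 : Int) from by decide] at hg
      injection hg with h
      exact ⟨17, by omega, (pv_T17 nl).mp ht, by omega⟩
    · rw [show PySem.Dict.get? pvRank "deepseek" = some (18 : Int) from by decide] at hg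
      injection hg with h
      exact ⟨18, by omega, (pv_T18 nl).mp ht, by omega⟩
    · rw [show PySem.Dict.get? pvRank "dolphin" = some (19 : Int) from by decide] at hg
      injection hg with h
      exact ⟨19, by omega, (pv_T19 nl).mp ht, by omega⟩
    · rw [show PySem.Dict.get? pvRank "yi" = some (20 : Int) from by decide] at hg
      injection hg with h
      exact ⟨20, by omega, (pv_T20 nl).mp ht, by omega⟩
    · rw [show PySem.Dict.get? pvRank "granite" = some (22 : Int) from by decide] at hg
      injection hg with h
      exact ⟨22, by omega, (pv_T22 nl).mp ht, by omega⟩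
    · rw [show PySem.Dict.get? pvRank "solar" = some (23 : Int) from by decide] at hg
      injection hg with h
      exact ⟨23, by omega, (pv_T23 nl).mp ht, by omega⟩
    · rw [show PySem.Dict.get? pvRank "nous-hermes" = some (24 : Int) from by decide] at hg
      injection hg with h
      exact ⟨24, by omega, (pv_T24 nl).mp ht, by omega⟩
    · rw [show PySem.Dict.get? pvRank "orca" = some (25 : Int) from by decide] at hg
      injection hg with h
      exact ⟨25, by omega, (pv_T25 nl).mp ht, by omega⟩
    · rw [show PySem.Dict.get? pvRank "vicuna" = some (26 : Int) from by decide] at hg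
      injection hg with h
      exact ⟨26, by omega, (pv_T26 nl).mp ht, by omega⟩
    · rw [show PySem.Dict.get? pvRank "falcon" = some (27 : Int) from by decide] at hg
      injection hg with h
      exact ⟨27, by omega, (pv_T27 nl).mp ht, by omega⟩
    · rw [show PySem.Dict.get? pvRank "starcoder" = some (28 : Int) from by decide] at hg
      injection hg with h
      exact ⟨28, by omega, (pv_T28 nl).mp ht, by omega⟩
    · rw [show PySem.Dict.get? pvRank "wizardcoder" = some (29 : Int) from by decide] at hg
      injection hg with h
      exact ⟨29, by omega, (pv_T29 nl).mp ht, by omega⟩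
    · rw [show PySem.Dict.get? pvRank "nemo" = none from by decide] at hg
      cases hg
    · rw [show PySem.Dict.get? pvRank "code" = none from by decide] at hg
      cases hg
    · rw [show PySem.Dict.get? pvRank "vision" = none from by decide] at hg
      cases hg
    · rw [show PySem.Dict.get? pvRank "0.5b" = none from by decide] at hg
      cases hg
    · rw [show PySem.Dict.get? pvRank "1b" = none from by decide] at hg
      cases hg
    · rw [show PySem.Dict.get? pvRank "3b" = none from by decide] at hg
      cases hg
    · rw [show PySem.Dict.get? pvRank "7b" = none from by decide] at hg
      cases hg
    · rw [show PySem.Dict.get? pvRank "8b" = none from by decide] at hg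
      cases hg
    · rw [show PySem.Dict.get? pvRank "14b" = none from by decide] at hg
      cases hg
    · rw [show PySem.Dict.get? pvRank "32b" = none from by decide] at hg
      cases hg
    · rw [show PySem.Dict.get? pvRank "70b" = none from by decide] at hg
      cases hg
    · rw [show PySem.Dict.get? pvRank "405b" = none from by decide] at hg
      cases hg
    · rw [show PySem.Dict.get? pvRank "mistral-nemo" = some (9 : Int) from by decide] at hg
      injection hg with h
      exact ⟨9, by omega, (pv_T9 nl).mp ht, by omega⟩
    · rw [show PySem.Dict.get? pvRank "granite-code" = some (21 : Int) from by decide] at hg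
      injection hg with h
      exact ⟨21, by omega, (pv_T21 nl).mp ht, by omega⟩
    · rw [show PySem.Dict.get? pvRank "llama3.2-vision" = some (1 : Int) from by decide] at hg
      injection hg with h
      exact ⟨1, by omega, (pv_T1 nl).mp ht, by omega⟩
  · rintro ⟨k, hk, hc, rfl⟩
    interval_cases k
    · exact ⟨"llama3.3", (pv_T0 nl).mpr hc, by decide⟩
    · exact ⟨"llama3.2-vision", (pv_T1 nl).mpr hc, by decide⟩
    · exact ⟨"llama3.2", (pv_T2 nl).mpr hc, by decide⟩
    · exact ⟨"llama3.1", (pv_T3 nl).mpr hc, by decide⟩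
    · exact ⟨"llama3", (pv_T4 nl).mpr hc, by decide⟩
    · exact ⟨"llama2", (pv_T5 nl).mpr hc, by decide⟩
    · exact ⟨"qwen2.5-coder", (pv_T6 nl).mpr hc, by decide⟩
    · exact ⟨"qwen2.5", (pv_T7 nl).mpr hc, by decide⟩
    · exact ⟨"qwen2", (pv_T8 nl).mpr hc, by decide⟩
    · exact ⟨"mistral-nemo", (pv_T9 nl).mpr hc, by decide⟩
    · exact ⟨"mistral", (pv_T10 nl).mpr hc, by decide⟩
    · exact ⟨"mixtral", (pv_T11 nl).mpr hc, by decide⟩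
    · exact ⟨"gemma2", (pv_T12 nl).mpr hc, by decide⟩
    · exact ⟨"gemma", (pv_T13 nl).mpr hc, by decide⟩
    · exact ⟨"phi3", (pv_T14 nl).mpr hc, by decide⟩
    · exact ⟨"codestral", (pv_T15 nl).mpr hc, by decide⟩
    · exact ⟨"codegemma", (pv_T16 nl).mpr hc, by decide⟩
    · exact ⟨"deepseek-coder", (pv_T17 nl).mpr hc, by decide⟩
    · exact ⟨"deepseek", (pv_T18 nl).mpr hc, by decide⟩
    · exact ⟨"dolphin", (pv_T19 nl).mpr hc, by decide⟩
    · exact ⟨"yi", (pv_T20 nl).mpr hc, by decide⟩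
    · exact ⟨"granite-code", (pv_T21 nl).mpr hc, by decide⟩
    · exact ⟨"granite", (pv_T22 nl).mpr hc, by decide⟩
    · exact ⟨"solar", (pv_T23 nl).mpr hc, by decide⟩
    · exact ⟨"nous-hermes", (pv_T24 nl).mpr hc, by decide⟩
    · exact ⟨"orca", (pv_T25 nl).mpr hc, by decide⟩
    · exact ⟨"vicuna", (pv_T26 nl).mpr hc, by decide⟩
    · exact ⟨"falcon", (pv_T27 nl).mpr hc, by decide⟩
    · exact ⟨"starcoder", (pv_T28 nl).mpr hc, by decide⟩
    · exact ⟨"wizardcoder", (pv_T29 nl).mpr hc, by decide⟩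

theorem pv_find_size (nl : String) (l : List String)
    (hc : ∀ sz ∈ l, PySem.Set.contains (pvToks nl.toList) sz = PySem.Str.isIn sz nl) :
    ((l.find? (fun sz => PySem.Set.contains (pvToks nl.toList) sz)).map PySem.Str.upper).getD "" = pvSizeLoop nl l := by
  induction l with
  | nil => rfl
  | cons s rest ih =>
    have h1 := hc s (List.mem_cons_self)
    by_cases h : PySem.Str.isIn s nl = true
    · rw [List.find?_cons_of_pos (by rw [h1]; exact h)]
      simp only [pvSizeLoop, if_pos h, Option.map_some, Option.getD_some]
    · rw [List.find?_cons_of_neg (by rw [h1]; exact h)]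
      simp only [pvSizeLoop, if_neg h]
      exact ih (fun z hz => hc z (List.mem_cons_of_mem _ hz))

theorem pv_sizeOf_eq (nl : String) :
    pvSizeOf (pvToks nl.toList) = pvSizeLoop nl ["0.5b", "1b", "3b", "7b", "8b", "14b", "32b", "70b", "405b"] := by
  have hc : ∀ sz ∈ pvBSizes, PySem.Set.contains (pvToks nl.toList) sz = PySem.Str.isIn sz nl := by
    intro sz hsz
    fin_cases hsz
    · exact pv_bool_eq_of_iff (by rw [PySem.Set.contains_iff]; exact pv_tokP_05b nl)
    · exact pv_bool_eq_of_iff (by rw [PySem.Set.contains_iff]; exact pv_tokP_1b nl)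
    · exact pv_bool_eq_of_iff (by rw [PySem.Set.contains_iff]; exact pv_tokP_3b nl)
    · exact pv_bool_eq_of_iff (by rw [PySem.Set.contains_iff]; exact pv_tokP_7b nl)
    · exact pv_bool_eq_of_iff (by rw [PySem.Set.contains_iff]; exact pv_tokP_8b nl)
    · exact pv_bool_eq_of_iff (by rw [PySem.Set.contains_iff]; exact pv_tokP_14b nl)
    · exact pv_bool_eq_of_iff (by rw [PySem.Set.contains_iff]; exact pv_tokP_32b nl)
    · exact pv_bool_eq_of_iff (by rw [PySem.Set.contains_iff]; exact pv_tokP_70b nl)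
    · exact pv_bool_eq_of_iff (by rw [PySem.Set.contains_iff]; exact pv_tokP_405b nl)
  exact pv_find_size nl pvBSizes hc

theorem pvSizeLoop_mem (nl : String) :
    pvSizeLoop nl ["0.5b", "1b", "3b", "7b", "8b", "14b", "32b", "70b", "405b"] = "" ∨ pvSizeLoop nl ["0.5b", "1b", "3b", "7b", "8b", "14b", "32b", "70b", "405b"] = "0.5B" ∨ pvSizeLoop nl ["0.5b", "1b", "3b", "7b", "8b", "14b", "32b", "70b", "405b"] = "1B" ∨ pvSizeLoop nl ["0.5b", "1b", "3b", "7b", "8b", "14b", "32b", "70b", "405b"] = "3B" ∨ pvSizeLoop nl ["0.5b", "1b", "3b", "7b", "8b", "14b", "32b", "70b", "405b"] = "7B" ∨ pvSizeLoop nl ["0.5b", "1b", "3b", "7b", "8b", "14b", "32b", "70b", "405b"] = "8B" ∨ pvSizeLoop nl ["0.5b", "1b", "3b", "7b", "8b", "14b", "32b", "70b", "405b"] = "14B" ∨ pvSizeLoop nl ["0.5b", "1b", "3b", "7b", "8b", "14b", "32b", "70b", "405b"] = "32B" ∨ pvSizeLoop nl ["0.5b", "1b", "3b", "7b", "8b",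 "14b", "32b", "70b", "405b"] = "70B" ∨ pvSizeLoop nl ["0.5b", "1b", "3b", "7b", "8b", "14b", "32b", "70b", "405b"] = "405B" := by
  simp only [pvSizeLoop]
  split_ifs <;> decide

theorem pv_min_eq (l : List Int) (k : Int) (hk : k ∈ l) (hlb : ∀ j ∈ l, k ≤ j) :
    PySem.List.min? l (fun x => x) = some k := by
  cases h : PySem.List.min? l (fun x => x) with
  | none =>
    rw [PySem.List.min?_eq_none_iff] at h
    rw [h] at hk
    simp at hk
  | some m =>
    have hm := PySem.List.min?_mem h
    have h1 := PySem.List.min?_isMin h k hk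
    have h2 := hlb m hm
    rw [le_antisymm h1 h2]

-- ===== VERDICT (by name: the statement is the Claim_ definition above) =====
set_option maxHeartbeats 12800000 in
theorem get_ollama_model_description_py_spec : Claim_equal_get_ollama_model_description_py := by
  intro mn _
  unfold Spec_get_ollama_model_description_py
  simp only [get_ollama_model_description_py, get_ollama_model_description_py_alt]
  set nl := PySem.Str.lower mn with hnl
  rw [pv_sizeOf_eq nl]
  have hsm := pvSizeLoop_mem nl
  generalize hgen : pvSizeLoop nl ["0.5b", "1b", "3b", "7b", "8b", "14b", "32b", "70b", "405b"] = sm at hsm ⊢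
  by_cases hc0 : pvCond nl 0 = true
  · have hr : (PySem.Str.isIn "llama3.3" nl || PySem.Str.isIn "llama-3.3" nl) = true := by simpa [pvCond] using hc0
    rw [if_pos hr]
    have hkmem := (pv_mem_ranks nl ((0 : Nat) : Int)).mpr ⟨0, by omega, hc0, rfl⟩
    have hlb : ∀ j ∈ (pvAddComposites (pvToks nl.toList)).filterMap (fun t => PySem.Dict.get? pvRank t), ((0 : Nat) : Int) ≤ j := by
      intro j hj
      obtain ⟨k', hk', hck', rfl⟩ := (pv_mem_ranks nl j).mp hj
      omega
    rw [pv_min_eq _ _ hkmem hlb]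
    rcases hsm with rfl|rfl|rfl|rfl|rfl|rfl|rfl|rfl|rfl|rfl <;> decide
  have hrn0 : ¬ (PySem.Str.isIn "llama3.3" nl || PySem.Str.isIn "llama-3.3" nl) = true := by simpa [pvCond] using hc0
  rw [if_neg hrn0]
  by_cases hc1 : pvCond nl 1 = true
  · have hr : (PySem.Str.isIn "llama3.2" nl || PySem.Str.isIn "llama-3.2" nl) = true ∧ PySem.Str.isIn "vision" nl = true := by
      simpa [pvCond, Bool.and_eq_true] using hc1
    rw [if_pos hr.1, if_pos hr.2]
    have hkmem := (pv_mem_ranks nl ((1 : Nat) : Int)).mpr ⟨1, by omega, hc1, rfl⟩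
    have hlb : ∀ j ∈ (pvAddComposites (pvToks nl.toList)).filterMap (fun t => PySem.Dict.get? pvRank t), ((1 : Nat) : Int) ≤ j := by
      intro j hj
      obtain ⟨k', hk', hck', rfl⟩ := (pv_mem_ranks nl j).mp hj
      rcases Nat.lt_or_ge k' 1 with hlt | hge
      · interval_cases k'
        · exact absurd hck' hc0
      · omega
    rw [pv_min_eq _ _ hkmem hlb]
    rcases hsm with rfl|rfl|rfl|rfl|rfl|rfl|rfl|rfl|rfl|rfl <;> decide
  by_cases hc2 : pvCond nl 2 = true
  · have hr : (PySem.Str.isIn "llama3.2" nl || PySem.Str.isIn "llama-3.2" nl) = true := by simpa [pvCond] using hc2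
    have hv : ¬ PySem.Str.isIn "vision" nl = true := fun hv => hc1 (by simp only [pvCond, Bool.and_eq_true]; exact ⟨hr, hv⟩)
    rw [if_pos hr, if_neg hv]
    have hkmem := (pv_mem_ranks nl ((2 : Nat) : Int)).mpr ⟨2, by omega, hc2, rfl⟩
    have hlb : ∀ j ∈ (pvAddComposites (pvToks nl.toList)).filterMap (fun t => PySem.Dict.get? pvRank t), ((2 : Nat) : Int) ≤ j := by
      intro j hj
      obtain ⟨k', hk', hck', rfl⟩ := (pv_mem_ranks nl j).mp hj
      rcases Nat.lt_or_ge k' 2 with hlt | hge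
      · interval_cases k'
        · exact absurd hck' hc0
        · exact absurd hck' hc1
      · omega
    rw [pv_min_eq _ _ hkmem hlb]
    rcases hsm with rfl|rfl|rfl|rfl|rfl|rfl|rfl|rfl|rfl|rfl <;> decide
  have hr2 : ¬ (PySem.Str.isIn "llama3.2" nl || PySem.Str.isIn "llama-3.2" nl) = true := fun h32 => hc2 (by simpa [pvCond] using h32)
  rw [if_neg hr2]
  by_cases hc3 : pvCond nl 3 = true
  · have hr : (PySem.Str.isIn "llama3.1" nl || PySem.Str.isIn "llama-3.1" nl) = true := by simpa [pvCond] using hc3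
    rw [if_pos hr]
    have hkmem := (pv_mem_ranks nl ((3 : Nat) : Int)).mpr ⟨3, by omega, hc3, rfl⟩
    have hlb : ∀ j ∈ (pvAddComposites (pvToks nl.toList)).filterMap (fun t => PySem.Dict.get? pvRank t), ((3 : Nat) : Int) ≤ j := by
      intro j hj
      obtain ⟨k', hk', hck', rfl⟩ := (pv_mem_ranks nl j).mp hj
      rcases Nat.lt_or_ge k' 3 with hlt | hge
      · interval_cases k'
        · exact absurd hck' hc0
        · exact absurd hck' hc1
        · exact absurd hck' hc2
      · omega
    rw [pv_min_eq _ _ hkmem hlb]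
    rcases hsm with rfl|rfl|rfl|rfl|rfl|rfl|rfl|rfl|rfl|rfl <;> decide
  have hrn3 : ¬ (PySem.Str.isIn "llama3.1" nl || PySem.Str.isIn "llama-3.1" nl) = true := by simpa [pvCond] using hc3
  rw [if_neg hrn3]
  by_cases hc4 : pvCond nl 4 = true
  · have hr : (PySem.Str.isIn "llama3" nl || PySem.Str.isIn "llama-3" nl) = true := by simpa [pvCond] using hc4
    rw [if_pos hr]
    have hkmem := (pv_mem_ranks nl ((4 : Nat) : Int)).mpr ⟨4, by omega, hc4, rfl⟩
    have hlb : ∀ j ∈ (pvAddComposites (pvToks nl.toList)).filterMap (fun t => PySem.Dict.get? pvRank t), ((4 : Nat) : Int) ≤ j := by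
      intro j hj
      obtain ⟨k', hk', hck', rfl⟩ := (pv_mem_ranks nl j).mp hj
      rcases Nat.lt_or_ge k' 4 with hlt | hge
      · interval_cases k'
        · exact absurd hck' hc0
        · exact absurd hck' hc1
        · exact absurd hck' hc2
        · exact absurd hck' hc3
      · omega
    rw [pv_min_eq _ _ hkmem hlb]
    rcases hsm with rfl|rfl|rfl|rfl|rfl|rfl|rfl|rfl|rfl|rfl <;> decide
  have hrn4 : ¬ (PySem.Str.isIn "llama3" nl || PySem.Str.isIn "llama-3" nl) = true := by simpa [pvCond] using hc4
  rw [if_neg hrn4]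
  by_cases hc5 : pvCond nl 5 = true
  · have hr : PySem.Str.isIn "llama2" nl = true := by simpa [pvCond] using hc5
    rw [if_pos hr]
    have hkmem := (pv_mem_ranks nl ((5 : Nat) : Int)).mpr ⟨5, by omega, hc5, rfl⟩
    have hlb : ∀ j ∈ (pvAddComposites (pvToks nl.toList)).filterMap (fun t => PySem.Dict.get? pvRank t), ((5 : Nat) : Int) ≤ j := by
      intro j hj
      obtain ⟨k', hk', hck', rfl⟩ := (pv_mem_ranks nl j).mp hj
      rcases Nat.lt_or_ge k' 5 with hlt | hge
      · interval_cases k'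
        · exact absurd hck' hc0
        · exact absurd hck' hc1
        · exact absurd hck' hc2
        · exact absurd hck' hc3
        · exact absurd hck' hc4
      · omega
    rw [pv_min_eq _ _ hkmem hlb]
    rcases hsm with rfl|rfl|rfl|rfl|rfl|rfl|rfl|rfl|rfl|rfl <;> decide
  have hrn5 : ¬ PySem.Str.isIn "llama2" nl = true := by simpa [pvCond] using hc5
  rw [if_neg hrn5]
  by_cases hc6 : pvCond nl 6 = true
  · have hr : PySem.Str.isIn "qwen2.5-coder" nl = true := by simpa [pvCond] using hc6
    rw [if_pos hr]
    have hkmem := (pv_mem_ranks nl ((6 : Nat) : Int)).mpr ⟨6, by omega, hc6, rfl⟩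
    have hlb : ∀ j ∈ (pvAddComposites (pvToks nl.toList)).filterMap (fun t => PySem.Dict.get? pvRank t), ((6 : Nat) : Int) ≤ j := by
      intro j hj
      obtain ⟨k', hk', hck', rfl⟩ := (pv_mem_ranks nl j).mp hj
      rcases Nat.lt_or_ge k' 6 with hlt | hge
      · interval_cases k'
        · exact absurd hck' hc0
        · exact absurd hck' hc1
        · exact absurd hck' hc2
        · exact absurd hck' hc3
        · exact absurd hck' hc4
        · exact absurd hck' hc5
      · omega
    rw [pv_min_eq _ _ hkmem hlb]
    rcases hsm with rfl|rfl|rfl|rfl|rfl|rfl|rfl|rfl|rfl|rfl <;> decide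
  have hrn6 : ¬ PySem.Str.isIn "qwen2.5-coder" nl = true := by simpa [pvCond] using hc6
  rw [if_neg hrn6]
  by_cases hc7 : pvCond nl 7 = true
  · have hr : PySem.Str.isIn "qwen2.5" nl = true := by simpa [pvCond] using hc7
    rw [if_pos hr]
    have hkmem := (pv_mem_ranks nl ((7 : Nat) : Int)).mpr ⟨7, by omega, hc7, rfl⟩
    have hlb : ∀ j ∈ (pvAddComposites (pvToks nl.toList)).filterMap (fun t => PySem.Dict.get? pvRank t), ((7 : Nat) : Int) ≤ j := by
      intro j hj
      obtain ⟨k', hk', hck', rfl⟩ := (pv_mem_ranks nl j).mp hj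
      rcases Nat.lt_or_ge k' 7 with hlt | hge
      · interval_cases k'
        · exact absurd hck' hc0
        · exact absurd hck' hc1
        · exact absurd hck' hc2
        · exact absurd hck' hc3
        · exact absurd hck' hc4
        · exact absurd hck' hc5
        · exact absurd hck' hc6
      · omega
    rw [pv_min_eq _ _ hkmem hlb]
    rcases hsm with rfl|rfl|rfl|rfl|rfl|rfl|rfl|rfl|rfl|rfl <;> decide
  have hrn7 : ¬ PySem.Str.isIn "qwen2.5" nl = true := by simpa [pvCond] using hc7
  rw [if_neg hrn7]
  by_cases hc8 : pvCond nl 8 = true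
  · have hr : PySem.Str.isIn "qwen2" nl = true := by simpa [pvCond] using hc8
    rw [if_pos hr]
    have hkmem := (pv_mem_ranks nl ((8 : Nat) : Int)).mpr ⟨8, by omega, hc8, rfl⟩
    have hlb : ∀ j ∈ (pvAddComposites (pvToks nl.toList)).filterMap (fun t => PySem.Dict.get? pvRank t), ((8 : Nat) : Int) ≤ j := by
      intro j hj
      obtain ⟨k', hk', hck', rfl⟩ := (pv_mem_ranks nl j).mp hj
      rcases Nat.lt_or_ge k' 8 with hlt | hge
      · interval_cases k'
        · exact absurd hck' hc0
        · exact absurd hck' hc1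
        · exact absurd hck' hc2
        · exact absurd hck' hc3
        · exact absurd hck' hc4
        · exact absurd hck' hc5
        · exact absurd hck' hc6
        · exact absurd hck' hc7
      · omega
    rw [pv_min_eq _ _ hkmem hlb]
    rcases hsm with rfl|rfl|rfl|rfl|rfl|rfl|rfl|rfl|rfl|rfl <;> decide
  have hrn8 : ¬ PySem.Str.isIn "qwen2" nl = true := by simpa [pvCond] using hc8
  rw [if_neg hrn8]
  by_cases hc9 : pvCond nl 9 = true
  · have hr : (PySem.Str.isIn "mistral" nl && PySem.Str.isIn "nemo" nl) = true := by simpa [pvCond] using hc9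
    rw [if_pos hr]
    have hkmem := (pv_mem_ranks nl ((9 : Nat) : Int)).mpr ⟨9, by omega, hc9, rfl⟩
    have hlb : ∀ j ∈ (pvAddComposites (pvToks nl.toList)).filterMap (fun t => PySem.Dict.get? pvRank t), ((9 : Nat) : Int) ≤ j := by
      intro j hj
      obtain ⟨k', hk', hck', rfl⟩ := (pv_mem_ranks nl j).mp hj
      rcases Nat.lt_or_ge k' 9 with hlt | hge
      · interval_cases k'
        · exact absurd hck' hc0
        · exact absurd hck' hc1
        · exact absurd hck' hc2
        · exact absurd hck' hc3
        · exact absurd hck' hc4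
        · exact absurd hck' hc5
        · exact absurd hck' hc6
        · exact absurd hck' hc7
        · exact absurd hck' hc8
      · omega
    rw [pv_min_eq _ _ hkmem hlb]
    rcases hsm with rfl|rfl|rfl|rfl|rfl|rfl|rfl|rfl|rfl|rfl <;> decide
  have hrn9 : ¬ (PySem.Str.isIn "mistral" nl && PySem.Str.isIn "nemo" nl) = true := by simpa [pvCond] using hc9
  rw [if_neg hrn9]
  by_cases hc10 : pvCond nl 10 = true
  · have hr : PySem.Str.isIn "mistral" nl = true := by simpa [pvCond] using hc10
    rw [if_pos hr]
    have hkmem := (pv_mem_ranks nl ((10 : Nat) : Int)).mpr ⟨10, by omega, hc10, rfl⟩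
    have hlb : ∀ j ∈ (pvAddComposites (pvToks nl.toList)).filterMap (fun t => PySem.Dict.get? pvRank t), ((10 : Nat) : Int) ≤ j := by
      intro j hj
      obtain ⟨k', hk', hck', rfl⟩ := (pv_mem_ranks nl j).mp hj
      rcases Nat.lt_or_ge k' 10 with hlt | hge
      · interval_cases k'
        · exact absurd hck' hc0
        · exact absurd hck' hc1
        · exact absurd hck' hc2
        · exact absurd hck' hc3
        · exact absurd hck' hc4
        · exact absurd hck' hc5
        · exact absurd hck' hc6
        · exact absurd hck' hc7
        · exact absurd hck' hc8
        · exact absurd hck' hc9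
      · omega
    rw [pv_min_eq _ _ hkmem hlb]
    rcases hsm with rfl|rfl|rfl|rfl|rfl|rfl|rfl|rfl|rfl|rfl <;> decide
  have hrn10 : ¬ PySem.Str.isIn "mistral" nl = true := by simpa [pvCond] using hc10
  rw [if_neg hrn10]
  by_cases hc11 : pvCond nl 11 = true
  · have hr : PySem.Str.isIn "mixtral" nl = true := by simpa [pvCond] using hc11
    rw [if_pos hr]
    have hkmem := (pv_mem_ranks nl ((11 : Nat) : Int)).mpr ⟨11, by omega, hc11, rfl⟩
    have hlb : ∀ j ∈ (pvAddComposites (pvToks nl.toList)).filterMap (fun t => PySem.Dict.get? pvRank t), ((11 : Nat) : Int) ≤ j := by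
      intro j hj
      obtain ⟨k', hk', hck', rfl⟩ := (pv_mem_ranks nl j).mp hj
      rcases Nat.lt_or_ge k' 11 with hlt | hge
      · interval_cases k'
        · exact absurd hck' hc0
        · exact absurd hck' hc1
        · exact absurd hck' hc2
        · exact absurd hck' hc3
        · exact absurd hck' hc4
        · exact absurd hck' hc5
        · exact absurd hck' hc6
        · exact absurd hck' hc7
        · exact absurd hck' hc8
        · exact absurd hck' hc9
        · exact absurd hck' hc10
      · omega
    rw [pv_min_eq _ _ hkmem hlb]
    rcases hsm with rfl|rfl|rfl|rfl|rfl|rfl|rfl|rfl|rfl|rfl <;> decide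
  have hrn11 : ¬ PySem.Str.isIn "mixtral" nl = true := by simpa [pvCond] using hc11
  rw [if_neg hrn11]
  by_cases hc12 : pvCond nl 12 = true
  · have hr : PySem.Str.isIn "gemma2" nl = true := by simpa [pvCond] using hc12
    rw [if_pos hr]
    have hkmem := (pv_mem_ranks nl ((12 : Nat) : Int)).mpr ⟨12, by omega, hc12, rfl⟩
    have hlb : ∀ j ∈ (pvAddComposites (pvToks nl.toList)).filterMap (fun t => PySem.Dict.get? pvRank t), ((12 : Nat) : Int) ≤ j := by
      intro j hj
      obtain ⟨k', hk', hck', rfl⟩ := (pv_mem_ranks nl j).mp hj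
      rcases Nat.lt_or_ge k' 12 with hlt | hge
      · interval_cases k'
        · exact absurd hck' hc0
        · exact absurd hck' hc1
        · exact absurd hck' hc2
        · exact absurd hck' hc3
        · exact absurd hck' hc4
        · exact absurd hck' hc5
        · exact absurd hck' hc6
        · exact absurd hck' hc7
        · exact absurd hck' hc8
        · exact absurd hck' hc9
        · exact absurd hck' hc10
        · exact absurd hck' hc11
      · omega
    rw [pv_min_eq _ _ hkmem hlb]
    rcases hsm with rfl|rfl|rfl|rfl|rfl|rfl|rfl|rfl|rfl|rfl <;> decide
  have hrn12 : ¬ PySem.Str.isIn "gemma2" nl = true := by simpa [pvCond] using hc12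
  rw [if_neg hrn12]
  by_cases hc13 : pvCond nl 13 = true
  · have hr : PySem.Str.isIn "gemma" nl = true := by simpa [pvCond] using hc13
    rw [if_pos hr]
    have hkmem := (pv_mem_ranks nl ((13 : Nat) : Int)).mpr ⟨13, by omega, hc13, rfl⟩
    have hlb : ∀ j ∈ (pvAddComposites (pvToks nl.toList)).filterMap (fun t => PySem.Dict.get? pvRank t), ((13 : Nat) : Int) ≤ j := by
      intro j hj
      obtain ⟨k', hk', hck', rfl⟩ := (pv_mem_ranks nl j).mp hj
      rcases Nat.lt_or_ge k' 13 with hlt | hge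
      · interval_cases k'
        · exact absurd hck' hc0
        · exact absurd hck' hc1
        · exact absurd hck' hc2
        · exact absurd hck' hc3
        · exact absurd hck' hc4
        · exact absurd hck' hc5
        · exact absurd hck' hc6
        · exact absurd hck' hc7
        · exact absurd hck' hc8
        · exact absurd hck' hc9
        · exact absurd hck' hc10
        · exact absurd hck' hc11
        · exact absurd hck' hc12
      · omega
    rw [pv_min_eq _ _ hkmem hlb]
    rcases hsm with rfl|rfl|rfl|rfl|rfl|rfl|rfl|rfl|rfl|rfl <;> decide
  have hrn13 : ¬ PySem.Str.isIn "gemma" nl = true := by simpa [pvCond] using hc13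
  rw [if_neg hrn13]
  by_cases hc14 : pvCond nl 14 = true
  · have hr : (PySem.Str.isIn "phi3" nl || PySem.Str.isIn "phi-3" nl) = true := by simpa [pvCond] using hc14
    rw [if_pos hr]
    have hkmem := (pv_mem_ranks nl ((14 : Nat) : Int)).mpr ⟨14, by omega, hc14, rfl⟩
    have hlb : ∀ j ∈ (pvAddComposites (pvToks nl.toList)).filterMap (fun t => PySem.Dict.get? pvRank t), ((14 : Nat) : Int) ≤ j := by
      intro j hj
      obtain ⟨k', hk', hck', rfl⟩ := (pv_mem_ranks nl j).mp hj
      rcases Nat.lt_or_ge k' 14 with hlt | hge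
      · interval_cases k'
        · exact absurd hck' hc0
        · exact absurd hck' hc1
        · exact absurd hck' hc2
        · exact absurd hck' hc3
        · exact absurd hck' hc4
        · exact absurd hck' hc5
        · exact absurd hck' hc6
        · exact absurd hck' hc7
        · exact absurd hck' hc8
        · exact absurd hck' hc9
        · exact absurd hck' hc10
        · exact absurd hck' hc11
        · exact absurd hck' hc12
        · exact absurd hck' hc13
      · omega
    rw [pv_min_eq _ _ hkmem hlb]
    rcases hsm with rfl|rfl|rfl|rfl|rfl|rfl|rfl|rfl|rfl|rfl <;> decide
  have hrn14 : ¬ (PySem.Str.isIn "phi3" nl || PySem.Str.isIn "phi-3" nl) = true := by simpa [pvCond] using hc14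
  rw [if_neg hrn14]
  by_cases hc15 : pvCond nl 15 = true
  · have hr : PySem.Str.isIn "codestral" nl = true := by simpa [pvCond] using hc15
    rw [if_pos hr]
    have hkmem := (pv_mem_ranks nl ((15 : Nat) : Int)).mpr ⟨15, by omega, hc15, rfl⟩
    have hlb : ∀ j ∈ (pvAddComposites (pvToks nl.toList)).filterMap (fun t => PySem.Dict.get? pvRank t), ((15 : Nat) : Int) ≤ j := by
      intro j hj
      obtain ⟨k', hk', hck', rfl⟩ := (pv_mem_ranks nl j).mp hj
      rcases Nat.lt_or_ge k' 15 with hlt | hge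
      · interval_cases k'
        · exact absurd hck' hc0
        · exact absurd hck' hc1
        · exact absurd hck' hc2
        · exact absurd hck' hc3
        · exact absurd hck' hc4
        · exact absurd hck' hc5
        · exact absurd hck' hc6
        · exact absurd hck' hc7
        · exact absurd hck' hc8
        · exact absurd hck' hc9
        · exact absurd hck' hc10
        · exact absurd hck' hc11
        · exact absurd hck' hc12
        · exact absurd hck' hc13
        · exact absurd hck' hc14
      · omega
    rw [pv_min_eq _ _ hkmem hlb]
    rcases hsm with rfl|rfl|rfl|rfl|rfl|rfl|rfl|rfl|rfl|rfl <;> decide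
  have hrn15 : ¬ PySem.Str.isIn "codestral" nl = true := by simpa [pvCond] using hc15
  rw [if_neg hrn15]
  by_cases hc16 : pvCond nl 16 = true
  · have hr : PySem.Str.isIn "codegemma" nl = true := by simpa [pvCond] using hc16
    rw [if_pos hr]
    have hkmem := (pv_mem_ranks nl ((16 : Nat) : Int)).mpr ⟨16, by omega, hc16, rfl⟩
    have hlb : ∀ j ∈ (pvAddComposites (pvToks nl.toList)).filterMap (fun t => PySem.Dict.get? pvRank t), ((16 : Nat) : Int) ≤ j := by
      intro j hj
      obtain ⟨k', hk', hck', rfl⟩ := (pv_mem_ranks nl j).mp hj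
      rcases Nat.lt_or_ge k' 16 with hlt | hge
      · interval_cases k'
        · exact absurd hck' hc0
        · exact absurd hck' hc1
        · exact absurd hck' hc2
        · exact absurd hck' hc3
        · exact absurd hck' hc4
        · exact absurd hck' hc5
        · exact absurd hck' hc6
        · exact absurd hck' hc7
        · exact absurd hck' hc8
        · exact absurd hck' hc9
        · exact absurd hck' hc10
        · exact absurd hck' hc11
        · exact absurd hck' hc12
        · exact absurd hck' hc13
        · exact absurd hck' hc14
        · exact absurd hck' hc15
      · omega
    rw [pv_min_eq _ _ hkmem hlb]
    rcases hsm with rfl|rfl|rfl|rfl|rfl|rfl|rfl|rfl|rfl|rfl <;> decide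
  have hrn16 : ¬ PySem.Str.isIn "codegemma" nl = true := by simpa [pvCond] using hc16
  rw [if_neg hrn16]
  by_cases hc17 : pvCond nl 17 = true
  · have hr : PySem.Str.isIn "deepseek-coder" nl = true := by simpa [pvCond] using hc17
    rw [if_pos hr]
    have hkmem := (pv_mem_ranks nl ((17 : Nat) : Int)).mpr ⟨17, by omega, hc17, rfl⟩
    have hlb : ∀ j ∈ (pvAddComposites (pvToks nl.toList)).filterMap (fun t => PySem.Dict.get? pvRank t), ((17 : Nat) : Int) ≤ j := by
      intro j hj
      obtain ⟨k', hk', hck', rfl⟩ := (pv_mem_ranks nl j).mp hj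
      rcases Nat.lt_or_ge k' 17 with hlt | hge
      · interval_cases k'
        · exact absurd hck' hc0
        · exact absurd hck' hc1
        · exact absurd hck' hc2
        · exact absurd hck' hc3
        · exact absurd hck' hc4
        · exact absurd hck' hc5
        · exact absurd hck' hc6
        · exact absurd hck' hc7
        · exact absurd hck' hc8
        · exact absurd hck' hc9
        · exact absurd hck' hc10
        · exact absurd hck' hc11
        · exact absurd hck' hc12
        · exact absurd hck' hc13
        · exact absurd hck' hc14
        · exact absurd hck' hc15
        · exact absurd hck' hc16
      · omega
    rw [pv_min_eq _ _ hkmem hlb]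
    rcases hsm with rfl|rfl|rfl|rfl|rfl|rfl|rfl|rfl|rfl|rfl <;> decide
  have hrn17 : ¬ PySem.Str.isIn "deepseek-coder" nl = true := by simpa [pvCond] using hc17
  rw [if_neg hrn17]
  by_cases hc18 : pvCond nl 18 = true
  · have hr : PySem.Str.isIn "deepseek" nl = true := by simpa [pvCond] using hc18
    rw [if_pos hr]
    have hkmem := (pv_mem_ranks nl ((18 : Nat) : Int)).mpr ⟨18, by omega, hc18, rfl⟩
    have hlb : ∀ j ∈ (pvAddComposites (pvToks nl.toList)).filterMap (fun t => PySem.Dict.get? pvRank t), ((18 : Nat) : Int) ≤ j := by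
      intro j hj
      obtain ⟨k', hk', hck', rfl⟩ := (pv_mem_ranks nl j).mp hj
      rcases Nat.lt_or_ge k' 18 with hlt | hge
      · interval_cases k'
        · exact absurd hck' hc0
        · exact absurd hck' hc1
        · exact absurd hck' hc2
        · exact absurd hck' hc3
        · exact absurd hck' hc4
        · exact absurd hck' hc5
        · exact absurd hck' hc6
        · exact absurd hck' hc7
        · exact absurd hck' hc8
        · exact absurd hck' hc9
        · exact absurd hck' hc10
        · exact absurd hck' hc11
        · exact absurd hck' hc12
        · exact absurd hck' hc13
        · exact absurd hck' hc14
        · exact absurd hck' hc15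
        · exact absurd hck' hc16
        · exact absurd hck' hc17
      · omega
    rw [pv_min_eq _ _ hkmem hlb]
    rcases hsm with rfl|rfl|rfl|rfl|rfl|rfl|rfl|rfl|rfl|rfl <;> decide
  have hrn18 : ¬ PySem.Str.isIn "deepseek" nl = true := by simpa [pvCond] using hc18
  rw [if_neg hrn18]
  by_cases hc19 : pvCond nl 19 = true
  · have hr : PySem.Str.isIn "dolphin" nl = true := by simpa [pvCond] using hc19
    rw [if_pos hr]
    have hkmem := (pv_mem_ranks nl ((19 : Nat) : Int)).mpr ⟨19, by omega, hc19, rfl⟩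
    have hlb : ∀ j ∈ (pvAddComposites (pvToks nl.toList)).filterMap (fun t => PySem.Dict.get? pvRank t), ((19 : Nat) : Int) ≤ j := by
      intro j hj
      obtain ⟨k', hk', hck', rfl⟩ := (pv_mem_ranks nl j).mp hj
      rcases Nat.lt_or_ge k' 19 with hlt | hge
      · interval_cases k'
        · exact absurd hck' hc0
        · exact absurd hck' hc1
        · exact absurd hck' hc2
        · exact absurd hck' hc3
        · exact absurd hck' hc4
        · exact absurd hck' hc5
        · exact absurd hck' hc6
        · exact absurd hck' hc7
        · exact absurd hck' hc8
        · exact absurd hck' hc9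
        · exact absurd hck' hc10
        · exact absurd hck' hc11
        · exact absurd hck' hc12
        · exact absurd hck' hc13
        · exact absurd hck' hc14
        · exact absurd hck' hc15
        · exact absurd hck' hc16
        · exact absurd hck' hc17
        · exact absurd hck' hc18
      · omega
    rw [pv_min_eq _ _ hkmem hlb]
    rcases hsm with rfl|rfl|rfl|rfl|rfl|rfl|rfl|rfl|rfl|rfl <;> decide
  have hrn19 : ¬ PySem.Str.isIn "dolphin" nl = true := by simpa [pvCond] using hc19
  rw [if_neg hrn19]
  by_cases hc20 : pvCond nl 20 = true
  · have hr : PySem.Str.isIn "yi" nl = true := by simpa [pvCond] using hc20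
    rw [if_pos hr]
    have hkmem := (pv_mem_ranks nl ((20 : Nat) : Int)).mpr ⟨20, by omega, hc20, rfl⟩
    have hlb : ∀ j ∈ (pvAddComposites (pvToks nl.toList)).filterMap (fun t => PySem.Dict.get? pvRank t), ((20 : Nat) : Int) ≤ j := by
      intro j hj
      obtain ⟨k', hk', hck', rfl⟩ := (pv_mem_ranks nl j).mp hj
      rcases Nat.lt_or_ge k' 20 with hlt | hge
      · interval_cases k'
        · exact absurd hck' hc0
        · exact absurd hck' hc1
        · exact absurd hck' hc2
        · exact absurd hck' hc3
        · exact absurd hck' hc4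
        · exact absurd hck' hc5
        · exact absurd hck' hc6
        · exact absurd hck' hc7
        · exact absurd hck' hc8
        · exact absurd hck' hc9
        · exact absurd hck' hc10
        · exact absurd hck' hc11
        · exact absurd hck' hc12
        · exact absurd hck' hc13
        · exact absurd hck' hc14
        · exact absurd hck' hc15
        · exact absurd hck' hc16
        · exact absurd hck' hc17
        · exact absurd hck' hc18
        · exact absurd hck' hc19
      · omega
    rw [pv_min_eq _ _ hkmem hlb]
    rcases hsm with rfl|rfl|rfl|rfl|rfl|rfl|rfl|rfl|rfl|rfl <;> decide
  have hrn20 : ¬ PySem.Str.isIn "yi" nl = true := by simpa [pvCond] using hc20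
  rw [if_neg hrn20]
  by_cases hc21 : pvCond nl 21 = true
  · have hr : (PySem.Str.isIn "granite" nl && PySem.Str.isIn "code" nl) = true := by simpa [pvCond] using hc21
    rw [if_pos hr]
    have hkmem := (pv_mem_ranks nl ((21 : Nat) : Int)).mpr ⟨21, by omega, hc21, rfl⟩
    have hlb : ∀ j ∈ (pvAddComposites (pvToks nl.toList)).filterMap (fun t => PySem.Dict.get? pvRank t), ((21 : Nat) : Int) ≤ j := by
      intro j hj
      obtain ⟨k', hk', hck', rfl⟩ := (pv_mem_ranks nl j).mp hj
      rcases Nat.lt_or_ge k' 21 with hlt | hge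
      · interval_cases k'
        · exact absurd hck' hc0
        · exact absurd hck' hc1
        · exact absurd hck' hc2
        · exact absurd hck' hc3
        · exact absurd hck' hc4
        · exact absurd hck' hc5
        · exact absurd hck' hc6
        · exact absurd hck' hc7
        · exact absurd hck' hc8
        · exact absurd hck' hc9
        · exact absurd hck' hc10
        · exact absurd hck' hc11
        · exact absurd hck' hc12
        · exact absurd hck' hc13
        · exact absurd hck' hc14
        · exact absurd hck' hc15
        · exact absurd hck' hc16
        · exact absurd hck' hc17
        · exact absurd hck' hc18
        · exact absurd hck' hc19
        · exact absurd hck' hc20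
      · omega
    rw [pv_min_eq _ _ hkmem hlb]
    rcases hsm with rfl|rfl|rfl|rfl|rfl|rfl|rfl|rfl|rfl|rfl <;> decide
  have hrn21 : ¬ (PySem.Str.isIn "granite" nl && PySem.Str.isIn "code" nl) = true := by simpa [pvCond] using hc21
  rw [if_neg hrn21]
  by_cases hc22 : pvCond nl 22 = true
  · have hr : PySem.Str.isIn "granite" nl = true := by simpa [pvCond] using hc22
    rw [if_pos hr]
    have hkmem := (pv_mem_ranks nl ((22 : Nat) : Int)).mpr ⟨22, by omega, hc22, rfl⟩
    have hlb : ∀ j ∈ (pvAddComposites (pvToks nl.toList)).filterMap (fun t => PySem.Dict.get? pvRank t), ((22 : Nat) : Int) ≤ j := by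
      intro j hj
      obtain ⟨k', hk', hck', rfl⟩ := (pv_mem_ranks nl j).mp hj
      rcases Nat.lt_or_ge k' 22 with hlt | hge
      · interval_cases k'
        · exact absurd hck' hc0
        · exact absurd hck' hc1
        · exact absurd hck' hc2
        · exact absurd hck' hc3
        · exact absurd hck' hc4
        · exact absurd hck' hc5
        · exact absurd hck' hc6
        · exact absurd hck' hc7
        · exact absurd hck' hc8
        · exact absurd hck' hc9
        · exact absurd hck' hc10
        · exact absurd hck' hc11
        · exact absurd hck' hc12
        · exact absurd hck' hc13
        · exact absurd hck' hc14
        · exact absurd hck' hc15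
        · exact absurd hck' hc16
        · exact absurd hck' hc17
        · exact absurd hck' hc18
        · exact absurd hck' hc19
        · exact absurd hck' hc20
        · exact absurd hck' hc21
      · omega
    rw [pv_min_eq _ _ hkmem hlb]
    rcases hsm with rfl|rfl|rfl|rfl|rfl|rfl|rfl|rfl|rfl|rfl <;> decide
  have hrn22 : ¬ PySem.Str.isIn "granite" nl = true := by simpa [pvCond] using hc22
  rw [if_neg hrn22]
  by_cases hc23 : pvCond nl 23 = true
  · have hr : PySem.Str.isIn "solar" nl = true := by simpa [pvCond] using hc23
    rw [if_pos hr]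
    have hkmem := (pv_mem_ranks nl ((23 : Nat) : Int)).mpr ⟨23, by omega, hc23, rfl⟩
    have hlb : ∀ j ∈ (pvAddComposites (pvToks nl.toList)).filterMap (fun t => PySem.Dict.get? pvRank t), ((23 : Nat) : Int) ≤ j := by
      intro j hj
      obtain ⟨k', hk', hck', rfl⟩ := (pv_mem_ranks nl j).mp hj
      rcases Nat.lt_or_ge k' 23 with hlt | hge
      · interval_cases k'
        · exact absurd hck' hc0
        · exact absurd hck' hc1
        · exact absurd hck' hc2
        · exact absurd hck' hc3
        · exact absurd hck' hc4
        · exact absurd hck' hc5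
        · exact absurd hck' hc6
        · exact absurd hck' hc7
        · exact absurd hck' hc8
        · exact absurd hck' hc9
        · exact absurd hck' hc10
        · exact absurd hck' hc11
        · exact absurd hck' hc12
        · exact absurd hck' hc13
        · exact absurd hck' hc14
        · exact absurd hck' hc15
        · exact absurd hck' hc16
        · exact absurd hck' hc17
        · exact absurd hck' hc18
        · exact absurd hck' hc19
        · exact absurd hck' hc20
        · exact absurd hck' hc21
        · exact absurd hck' hc22
      · omega
    rw [pv_min_eq _ _ hkmem hlb]
    rcases hsm with rfl|rfl|rfl|rfl|rfl|rfl|rfl|rfl|rfl|rfl <;> decide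
  have hrn23 : ¬ PySem.Str.isIn "solar" nl = true := by simpa [pvCond] using hc23
  rw [if_neg hrn23]
  by_cases hc24 : pvCond nl 24 = true
  · have hr : (PySem.Str.isIn "nous" nl || PySem.Str.isIn "hermes" nl) = true := by simpa [pvCond] using hc24
    rw [if_pos hr]
    have hkmem := (pv_mem_ranks nl ((24 : Nat) : Int)).mpr ⟨24, by omega, hc24, rfl⟩
    have hlb : ∀ j ∈ (pvAddComposites (pvToks nl.toList)).filterMap (fun t => PySem.Dict.get? pvRank t), ((24 : Nat) : Int) ≤ j := by
      intro j hj
      obtain ⟨k', hk', hck', rfl⟩ := (pv_mem_ranks nl j).mp hj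
      rcases Nat.lt_or_ge k' 24 with hlt | hge
      · interval_cases k'
        · exact absurd hck' hc0
        · exact absurd hck' hc1
        · exact absurd hck' hc2
        · exact absurd hck' hc3
        · exact absurd hck' hc4
        · exact absurd hck' hc5
        · exact absurd hck' hc6
        · exact absurd hck' hc7
        · exact absurd hck' hc8
        · exact absurd hck' hc9
        · exact absurd hck' hc10
        · exact absurd hck' hc11
        · exact absurd hck' hc12
        · exact absurd hck' hc13
        · exact absurd hck' hc14
        · exact absurd hck' hc15
        · exact absurd hck' hc16
        · exact absurd hck' hc17
        · exact absurd hck' hc18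
        · exact absurd hck' hc19
        · exact absurd hck' hc20
        · exact absurd hck' hc21
        · exact absurd hck' hc22
        · exact absurd hck' hc23
      · omega
    rw [pv_min_eq _ _ hkmem hlb]
    rcases hsm with rfl|rfl|rfl|rfl|rfl|rfl|rfl|rfl|rfl|rfl <;> decide
  have hrn24 : ¬ (PySem.Str.isIn "nous" nl || PySem.Str.isIn "hermes" nl) = true := by simpa [pvCond] using hc24
  rw [if_neg hrn24]
  by_cases hc25 : pvCond nl 25 = true
  · have hr : PySem.Str.isIn "orca" nl = true := by simpa [pvCond] using hc25
    rw [if_pos hr]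
    have hkmem := (pv_mem_ranks nl ((25 : Nat) : Int)).mpr ⟨25, by omega, hc25, rfl⟩
    have hlb : ∀ j ∈ (pvAddComposites (pvToks nl.toList)).filterMap (fun t => PySem.Dict.get? pvRank t), ((25 : Nat) : Int) ≤ j := by
      intro j hj
      obtain ⟨k', hk', hck', rfl⟩ := (pv_mem_ranks nl j).mp hj
      rcases Nat.lt_or_ge k' 25 with hlt | hge
      · interval_cases k'
        · exact absurd hck' hc0
        · exact absurd hck' hc1
        · exact absurd hck' hc2
        · exact absurd hck' hc3
        · exact absurd hck' hc4
        · exact absurd hck' hc5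
        · exact absurd hck' hc6
        · exact absurd hck' hc7
        · exact absurd hck' hc8
        · exact absurd hck' hc9
        · exact absurd hck' hc10
        · exact absurd hck' hc11
        · exact absurd hck' hc12
        · exact absurd hck' hc13
        · exact absurd hck' hc14
        · exact absurd hck' hc15
        · exact absurd hck' hc16
        · exact absurd hck' hc17
        · exact absurd hck' hc18
        · exact absurd hck' hc19
        · exact absurd hck' hc20
        · exact absurd hck' hc21
        · exact absurd hck' hc22
        · exact absurd hck' hc23
        · exact absurd hck' hc24
      · omega
    rw [pv_min_eq _ _ hkmem hlb]
    rcases hsm with rfl|rfl|rfl|rfl|rfl|rfl|rfl|rfl|rfl|rfl <;> decide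
  have hrn25 : ¬ PySem.Str.isIn "orca" nl = true := by simpa [pvCond] using hc25
  rw [if_neg hrn25]
  by_cases hc26 : pvCond nl 26 = true
  · have hr : PySem.Str.isIn "vicuna" nl = true := by simpa [pvCond] using hc26
    rw [if_pos hr]
    have hkmem := (pv_mem_ranks nl ((26 : Nat) : Int)).mpr ⟨26, by omega, hc26, rfl⟩
    have hlb : ∀ j ∈ (pvAddComposites (pvToks nl.toList)).filterMap (fun t => PySem.Dict.get? pvRank t), ((26 : Nat) : Int) ≤ j := by
      intro j hj
      obtain ⟨k', hk', hck', rfl⟩ := (pv_mem_ranks nl j).mp hj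
      rcases Nat.lt_or_ge k' 26 with hlt | hge
      · interval_cases k'
        · exact absurd hck' hc0
        · exact absurd hck' hc1
        · exact absurd hck' hc2
        · exact absurd hck' hc3
        · exact absurd hck' hc4
        · exact absurd hck' hc5
        · exact absurd hck' hc6
        · exact absurd hck' hc7
        · exact absurd hck' hc8
        · exact absurd hck' hc9
        · exact absurd hck' hc10
        · exact absurd hck' hc11
        · exact absurd hck' hc12
        · exact absurd hck' hc13
        · exact absurd hck' hc14
        · exact absurd hck' hc15
        · exact absurd hck' hc16
        · exact absurd hck' hc17
        · exact absurd hck' hc18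
        · exact absurd hck' hc19
        · exact absurd hck' hc20
        · exact absurd hck' hc21
        · exact absurd hck' hc22
        · exact absurd hck' hc23
        · exact absurd hck' hc24
        · exact absurd hck' hc25
      · omega
    rw [pv_min_eq _ _ hkmem hlb]
    rcases hsm with rfl|rfl|rfl|rfl|rfl|rfl|rfl|rfl|rfl|rfl <;> decide
  have hrn26 : ¬ PySem.Str.isIn "vicuna" nl = true := by simpa [pvCond] using hc26
  rw [if_neg hrn26]
  by_cases hc27 : pvCond nl 27 = true
  · have hr : PySem.Str.isIn "falcon" nl = true := by simpa [pvCond] using hc27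
    rw [if_pos hr]
    have hkmem := (pv_mem_ranks nl ((27 : Nat) : Int)).mpr ⟨27, by omega, hc27, rfl⟩
    have hlb : ∀ j ∈ (pvAddComposites (pvToks nl.toList)).filterMap (fun t => PySem.Dict.get? pvRank t), ((27 : Nat) : Int) ≤ j := by
      intro j hj
      obtain ⟨k', hk', hck', rfl⟩ := (pv_mem_ranks nl j).mp hj
      rcases Nat.lt_or_ge k' 27 with hlt | hge
      · interval_cases k'
        · exact absurd hck' hc0
        · exact absurd hck' hc1
        · exact absurd hck' hc2
        · exact absurd hck' hc3
        · exact absurd hck' hc4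
        · exact absurd hck' hc5
        · exact absurd hck' hc6
        · exact absurd hck' hc7
        · exact absurd hck' hc8
        · exact absurd hck' hc9
        · exact absurd hck' hc10
        · exact absurd hck' hc11
        · exact absurd hck' hc12
        · exact absurd hck' hc13
        · exact absurd hck' hc14
        · exact absurd hck' hc15
        · exact absurd hck' hc16
        · exact absurd hck' hc17
        · exact absurd hck' hc18
        · exact absurd hck' hc19
        · exact absurd hck' hc20
        · exact absurd hck' hc21
        · exact absurd hck' hc22
        · exact absurd hck' hc23
        · exact absurd hck' hc24
        · exact absurd hck' hc25
        · exact absurd hck' hc26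
      · omega
    rw [pv_min_eq _ _ hkmem hlb]
    rcases hsm with rfl|rfl|rfl|rfl|rfl|rfl|rfl|rfl|rfl|rfl <;> decide
  have hrn27 : ¬ PySem.Str.isIn "falcon" nl = true := by simpa [pvCond] using hc27
  rw [if_neg hrn27]
  by_cases hc28 : pvCond nl 28 = true
  · have hr : PySem.Str.isIn "starcoder" nl = true := by simpa [pvCond] using hc28
    rw [if_pos hr]
    have hkmem := (pv_mem_ranks nl ((28 : Nat) : Int)).mpr ⟨28, by omega, hc28, rfl⟩
    have hlb : ∀ j ∈ (pvAddComposites (pvToks nl.toList)).filterMap (fun t => PySem.Dict.get? pvRank t), ((28 : Nat) : Int) ≤ j := by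
      intro j hj
      obtain ⟨k', hk', hck', rfl⟩ := (pv_mem_ranks nl j).mp hj
      rcases Nat.lt_or_ge k' 28 with hlt | hge
      · interval_cases k'
        · exact absurd hck' hc0
        · exact absurd hck' hc1
        · exact absurd hck' hc2
        · exact absurd hck' hc3
        · exact absurd hck' hc4
        · exact absurd hck' hc5
        · exact absurd hck' hc6
        · exact absurd hck' hc7
        · exact absurd hck' hc8
        · exact absurd hck' hc9
        · exact absurd hck' hc10
        · exact absurd hck' hc11
        · exact absurd hck' hc12
        · exact absurd hck' hc13
        · exact absurd hck' hc14
        · exact absurd hck' hc15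
        · exact absurd hck' hc16
        · exact absurd hck' hc17
        · exact absurd hck' hc18
        · exact absurd hck' hc19
        · exact absurd hck' hc20
        · exact absurd hck' hc21
        · exact absurd hck' hc22
        · exact absurd hck' hc23
        · exact absurd hck' hc24
        · exact absurd hck' hc25
        · exact absurd hck' hc26
        · exact absurd hck' hc27
      · omega
    rw [pv_min_eq _ _ hkmem hlb]
    rcases hsm with rfl|rfl|rfl|rfl|rfl|rfl|rfl|rfl|rfl|rfl <;> decide
  have hrn28 : ¬ PySem.Str.isIn "starcoder" nl = true := by simpa [pvCond] using hc28
  rw [if_neg hrn28]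
  by_cases hc29 : pvCond nl 29 = true
  · have hr : PySem.Str.isIn "wizardcoder" nl = true := by simpa [pvCond] using hc29
    rw [if_pos hr]
    have hkmem := (pv_mem_ranks nl ((29 : Nat) : Int)).mpr ⟨29, by omega, hc29, rfl⟩
    have hlb : ∀ j ∈ (pvAddComposites (pvToks nl.toList)).filterMap (fun t => PySem.Dict.get? pvRank t), ((29 : Nat) : Int) ≤ j := by
      intro j hj
      obtain ⟨k', hk', hck', rfl⟩ := (pv_mem_ranks nl j).mp hj
      rcases Nat.lt_or_ge k' 29 with hlt | hge
      · interval_cases k'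
        · exact absurd hck' hc0
        · exact absurd hck' hc1
        · exact absurd hck' hc2
        · exact absurd hck' hc3
        · exact absurd hck' hc4
        · exact absurd hck' hc5
        · exact absurd hck' hc6
        · exact absurd hck' hc7
        · exact absurd hck' hc8
        · exact absurd hck' hc9
        · exact absurd hck' hc10
        · exact absurd hck' hc11
        · exact absurd hck' hc12
        · exact absurd hck' hc13
        · exact absurd hck' hc14
        · exact absurd hck' hc15
        · exact absurd hck' hc16
        · exact absurd hck' hc17
        · exact absurd hck' hc18
        · exact absurd hck' hc19
        · exact absurd hck' hc20
        · exact absurd hck' hc21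
        · exact absurd hck' hc22
        · exact absurd hck' hc23
        · exact absurd hck' hc24
        · exact absurd hck' hc25
        · exact absurd hck' hc26
        · exact absurd hck' hc27
        · exact absurd hck' hc28
      · omega
    rw [pv_min_eq _ _ hkmem hlb]
    rcases hsm with rfl|rfl|rfl|rfl|rfl|rfl|rfl|rfl|rfl|rfl <;> decide
  have hrn29 : ¬ PySem.Str.isIn "wizardcoder" nl = true := by simpa [pvCond] using hc29
  rw [if_neg hrn29]
  have hnil : (pvAddComposites (pvToks nl.toList)).filterMap (fun t => PySem.Dict.get? pvRank t) = [] := by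
    rw [List.eq_nil_iff_forall_not_mem]
    intro j hj
    obtain ⟨k', hk', hck', rfl⟩ := (pv_mem_ranks nl j).mp hj
    interval_cases k'
    · exact hc0 hck'
    · exact hc1 hck'
    · exact hc2 hck'
    · exact hc3 hck'
    · exact hc4 hck'
    · exact hc5 hck'
    · exact hc6 hck'
    · exact hc7 hck'
    · exact hc8 hck'
    · exact hc9 hck'
    · exact hc10 hck'
    · exact hc11 hck'
    · exact hc12 hck'
    · exact hc13 hck'
    · exact hc14 hck'
    · exact hc15 hck'
    · exact hc16 hck'
    · exact hc17 hck'
    · exact hc18 hck'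
    · exact hc19 hck'
    · exact hc20 hck'
    · exact hc21 hck'
    · exact hc22 hck'
    · exact hc23 hck'
    · exact hc24 hck'
    · exact hc25 hck'
    · exact hc26 hck'
    · exact hc27 hck'
    · exact hc28 hck'
    · exact hc29 hck'
  rw [hnil]
  rcases hsm with rfl|rfl|rfl|rfl|rfl|rfl|rfl|rfl|rfl|rfl <;> decide
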